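-- pv_equiv track=rewrite | github.com/mlelarge/graph-conjectures | problems/pebbling_cartesian_product/scripts/run_root_orbit_certificates.py | compute_root_orbits
-- ===== SOURCE A (Python) =====
-- from itertools import permutations
--
-- def compute_root_orbits(L_n: int, L_edges) -> dict[tuple[int, int], list[tuple[int, int]]]:
--     """Compute orbits of V(L) x V(L) under Aut(L) x Z_2 (coord swap).
--
--     Returns a dict mapping orbit representative (lex-smallest) to the
--     list of all (a, b) pairs in that orbit.
--     """
--     adj_set: set[tuple[int, int]] = set()
--     deg = [0] * L_n
--     for u, v in L_edges:
--         adj_set.add((u, v))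
--         adj_set.add((v, u))
--         deg[u] += 1
--         deg[v] += 1
--
--     autos: list[tuple[int, ...]] = []
--     for perm in permutations(range(L_n)):
--         if any(deg[perm[i]] != deg[i] for i in range(L_n)):
--             continue
--         if all((perm[u], perm[v]) in adj_set for u, v in L_edges):
--             autos.append(perm)
--
--     parent = {(a, b): (a, b) for a in range(L_n) for b in range(L_n)}
--
--     def find(x):
--         while parent[x] != x:
--             parent[x] = parent[parent[x]]
--             x = parent[x]
--         return x
--
--     def union(x, y):
--         rx, ry = find(x), find(y)
--         if rx != ry:
--             parent[rx] = ry
--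
--     for phi in autos:
--         for a in range(L_n):
--             for b in range(L_n):
--                 union((a, b), (phi[a], phi[b]))
--                 union((a, b), (phi[b], phi[a]))
--
--     orbits: dict[tuple[int, int], list[tuple[int, int]]] = {}
--     for v in parent:
--         r = find(v)
--         orbits.setdefault(r, []).append(v)
--
--     # Re-key by lex-smallest representative
--     return {min(o): sorted(o) for o in orbits.values()}
-- ===== SOURCE B (Python) =====
-- from itertools import permutations
--
--
-- def compute_root_orbits(L_n: int, L_edges) -> dict[tuple[int, int], list[tuple[int, int]]]:
--     """Compute orbits of V(L) x V(L) under Aut(L) x Z_2 (coord swap).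
--
--     Same adjacency build and automorphism search as the original; the orbits
--     are then produced directly by worklist closure instead of union-find:
--     scanning pairs in lexicographic order, each not-yet-visited pair is the
--     lex-smallest member of its orbit, and its orbit is grown by repeatedly
--     applying every automorphism (both coordinate orders) until stable.
--     """
--     adj_set: set[tuple[int, int]] = set()
--     deg = [0] * L_n
--     for u, v in L_edges:
--         adj_set.add((u, v))
--         adj_set.add((v, u))
--         deg[u] += 1
--         deg[v] += 1
--
--     autos: list[tuple[int, ...]] = []
--     for perm in permutations(range(L_n)):
--         if any(deg[perm[i]] != deg[i] for i in range(L_n)):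
--             continue
--         if all((perm[u], perm[v]) in adj_set for u, v in L_edges):
--             autos.append(perm)
--
--     visited: set[tuple[int, int]] = set()
--     result: dict[tuple[int, int], list[tuple[int, int]]] = {}
--     for a in range(L_n):
--         for b in range(L_n):
--             if (a, b) in visited:
--                 continue
--             orbit = {(a, b)}
--             stack = [(a, b)]
--             while stack:
--                 x, y = stack.pop()
--                 for phi in autos:
--                     for q in ((phi[x], phi[y]), (phi[y], phi[x])):
--                         if q not in orbit:
--                             orbit.add(q)
--                             stack.append(q)
--             visited |= orbit
--             result[(a, b)] = sorted(orbit)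
--     return result
-- ===== Notes on version B (the rewrite author's own statement) =====
-- stated objective: simpler
-- what changed: The adjacency build and permutation-scan automorphism search are kept; the union-find over all vertex pairs (parent dict, path-compressing find, union) is replaced by a direct worklist closure: scanning pairs in lexicographic order, each unvisited pair is the lex-least member of its orbit, and its orbit is grown by repeatedly applying every automorphism in both coordinate orders until stable.
import Mathlib
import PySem

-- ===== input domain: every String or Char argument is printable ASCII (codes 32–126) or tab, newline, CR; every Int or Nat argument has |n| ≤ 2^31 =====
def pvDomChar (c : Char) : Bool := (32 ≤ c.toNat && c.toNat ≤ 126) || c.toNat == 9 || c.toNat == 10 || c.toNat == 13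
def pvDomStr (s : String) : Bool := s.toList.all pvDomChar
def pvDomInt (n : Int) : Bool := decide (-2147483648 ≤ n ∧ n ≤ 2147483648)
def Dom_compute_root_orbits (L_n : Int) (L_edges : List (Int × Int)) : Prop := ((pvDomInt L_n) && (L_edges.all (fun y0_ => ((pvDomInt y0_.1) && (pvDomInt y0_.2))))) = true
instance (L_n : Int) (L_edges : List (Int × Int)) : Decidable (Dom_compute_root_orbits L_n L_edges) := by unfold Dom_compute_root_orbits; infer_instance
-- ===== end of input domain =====

-- ===== PORT A =====
-- B changes only the orbit construction: union-find is replaced by a direct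
-- worklist closure over the automorphism images (objective: simpler).
-- Shared helper code: the adjacency/degree build and the permutation-scan
-- automorphism search are literally the same Python lines in A and in B,
-- so both ports use the helpers pvApply/pvBuildAdjDeg/pvAutos/pvPairsList.
def pvApply (phi : List Int) (i : Int) : Int := PySem.List.pyGetD phi i 0

def pvBuildAdjDeg (L_n : Int) (L_edges : List (Int × Int)) :
    PySem.Set (Int × Int) × List Int :=
  L_edges.foldl (fun st uv =>
      let adj := PySem.Set.add (PySem.Set.add st.1 (uv.1, uv.2)) (uv.2, uv.1)
      let deg := PySem.List.pySetD st.2 uv.1 (PySem.List.pyGetD st.2 uv.1 0 + 1)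
      let deg := PySem.List.pySetD deg uv.2 (PySem.List.pyGetD deg uv.2 0 + 1)
      (adj, deg))
    (PySem.Set.empty, List.replicate L_n.toNat 0)

def pvAutos (L_n : Int) (L_edges : List (Int × Int)) : List (List Int) :=
  let ad := pvBuildAdjDeg L_n L_edges
  let rng := PySem.List.pyRange 0 L_n 1
  (PySem.List.permutations rng rng.length).filter (fun perm =>
    !((PySem.List.pyRange 0 L_n 1).any (fun i =>
        decide (PySem.List.pyGetD ad.2 (pvApply perm i) 0 ≠ PySem.List.pyGetD ad.2 i 0))) &&
    L_edges.all (fun uv => PySem.Set.contains ad.1 (pvApply perm uv.1, pvApply perm uv.2)))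

def pvPairsList (L_n : Int) : List (Int × Int) :=
  (PySem.List.pyRange 0 L_n 1).flatMap
    (fun a => (PySem.List.pyRange 0 L_n 1).map (fun b => (a, b)))

-- A-side union-find (path-compressing find; fuel makes the while-loop total,
-- it never runs out on the reachable parent maps)
def pvFindF : Nat → PySem.Dict (Int × Int) (Int × Int) → (Int × Int) →
    ((Int × Int) × PySem.Dict (Int × Int) (Int × Int))
  | 0, par, x => (x, par)
  | f+1, par, x =>
    let px := par.getD x x
    if px = x then (x, par)
    else
      let ppx := par.getD px px
      pvFindF f (par.insert x ppx) ppx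

def pvFind (par : PySem.Dict (Int × Int) (Int × Int)) (x : Int × Int) :
    ((Int × Int) × PySem.Dict (Int × Int) (Int × Int)) :=
  pvFindF (par.size + 1) par x

def pvUnion (par : PySem.Dict (Int × Int) (Int × Int)) (x y : Int × Int) :
    PySem.Dict (Int × Int) (Int × Int) :=
  let r1 := pvFind par x
  let r2 := pvFind r1.2 y
  if r1.1 ≠ r2.1 then r2.2.insert r1.1 r2.1 else r2.2

def compute_root_orbits (L_n : Int) (L_edges : List (Int × Int)) :
    List (Int × Int × List (Int × Int)) :=
  let autos := pvAutos L_n L_edges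
  let pairs := pvPairsList L_n
  let parent0 := pairs.foldl (fun d p => d.insert p p)
    (PySem.Dict.empty : PySem.Dict (Int × Int) (Int × Int))
  let parent1 := autos.foldl (fun par phi =>
      pairs.foldl (fun par p =>
          pvUnion (pvUnion par p (pvApply phi p.1, pvApply phi p.2)) p
            (pvApply phi p.2, pvApply phi p.1)) par) parent0
  let st := pairs.foldl
    (fun (st : PySem.Dict (Int × Int) (List (Int × Int)) ×
               PySem.Dict (Int × Int) (Int × Int)) v =>
      let fr := pvFind st.2 v
      (st.1.modify fr.1 [] (· ++ [v]), fr.2))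
    (PySem.Dict.empty, parent1)
  let fin := st.1.values.foldl
    (fun (d : PySem.Dict (Int × Int) (List (Int × Int))) o =>
      d.insert ((PySem.List.min2? o Prod.fst Prod.snd).getD (0, 0))
        (PySem.List.sorted2 o Prod.fst Prod.snd))
    PySem.Dict.empty
  fin.items.map (fun kv => (kv.1.1, kv.1.2, kv.2))

-- ===== PORT B =====
-- the while-stack worklist closure of one orbit (fuel bounds the loop, it
-- never runs out: each iteration pops one element and every push enlarges
-- the orbit, which stays inside the L_n × L_n pair universe)
def pvClose : Nat → List (List Int) → PySem.Set (Int × Int) → List (Int × Int) →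
    PySem.Set (Int × Int)
  | 0, _, orbit, _ => orbit
  | f+1, autos, orbit, stack =>
    match PySem.List.pop? stack with
    | none => orbit
    | some (xy, stack') =>
      let st := autos.foldl
        (fun (st : PySem.Set (Int × Int) × List (Int × Int)) phi =>
          [(pvApply phi xy.1, pvApply phi xy.2),
           (pvApply phi xy.2, pvApply phi xy.1)].foldl
            (fun st q =>
              if PySem.Set.contains st.1 q then st
              else (PySem.Set.add st.1 q, st.2 ++ [q])) st)
        (orbit, stack')
      pvClose f autos st.1 st.2

def compute_root_orbits_alt (L_n : Int) (L_edges : List (Int × Int)) :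
    List (Int × Int × List (Int × Int)) :=
  let autos := pvAutos L_n L_edges
  let st := (pvPairsList L_n).foldl
    (fun (st : PySem.Set (Int × Int) × PySem.Dict (Int × Int) (List (Int × Int))) p =>
      if PySem.Set.contains st.1 p then st
      else
        let orbit := pvClose (2 * (L_n.toNat * L_n.toNat) + 2) autos
          (PySem.Set.ofList [p]) [p]
        (PySem.Set.update st.1 orbit,
         st.2.insert p (PySem.List.sorted2 orbit Prod.fst Prod.snd)))
    (PySem.Set.empty, PySem.Dict.empty)
  st.2.items.map (fun kv => (kv.1.1, kv.1.2, kv.2))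

-- ===== PRECONDITION & SPEC =====
-- Pre_ excludes exactly the inputs where the Python raises IndexError:
-- an edge endpoint outside [-L_n, L_n) (deg[u] += 1 fails there).
def Pre_compute_root_orbits (L_n : Int) (L_edges : List (Int × Int)) : Prop :=
  ∀ uv ∈ L_edges, (-L_n ≤ uv.1 ∧ uv.1 < L_n) ∧ (-L_n ≤ uv.2 ∧ uv.2 < L_n)
instance (L_n : Int) (L_edges : List (Int × Int)) :
    Decidable (Pre_compute_root_orbits L_n L_edges) := by
  unfold Pre_compute_root_orbits; infer_instance

def pvWitness_compute_root_orbits : Int × (List (Int × Int)) := (3, [(0, 1), (1, 2)])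

def Spec_compute_root_orbits (L_n : Int) (L_edges : List (Int × Int)) (out : List (Int × Int × List (Int × Int))) : Prop := out = compute_root_orbits_alt L_n L_edges
instance (L_n : Int) (L_edges : List (Int × Int)) (out : List (Int × Int × List (Int × Int))) : Decidable (Spec_compute_root_orbits L_n L_edges out) := by unfold Spec_compute_root_orbits; infer_instance

-- ===== CLAIM (what is proved, stated in full; the proofs are below) =====
def Claim_equal_compute_root_orbits : Prop := ∀ (L_n : Int) (L_edges : List (Int × Int)), Dom_compute_root_orbits L_n L_edges → Pre_compute_root_orbits L_n L_edges → Spec_compute_root_orbits L_n L_edges (compute_root_orbits L_n L_edges)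

-- ===== LEMMAS AND PROOFS =====


-- ---------- generic setup: step relation, generated equivalence ----------
def pvF1 (phi : List Int) (p : Int × Int) : Int × Int := (pvApply phi p.1, pvApply phi p.2)
def pvF2 (phi : List Int) (p : Int × Int) : Int × Int := (pvApply phi p.2, pvApply phi p.1)

def pvUAll (autos : List (List Int)) (P : List (Int × Int)) : List ((Int × Int) × (Int × Int)) :=
  autos.flatMap (fun phi => P.flatMap (fun p => [(p, pvF1 phi p), (p, pvF2 phi p)]))

def pvE (autos : List (List Int)) (P : List (Int × Int)) (x y : Int × Int) : Prop :=
  Relation.EqvGen (fun a b => (a, b) ∈ pvUAll autos P) x y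

def pvStep (autos : List (List Int)) (p q : Int × Int) : Prop :=
  ∃ phi ∈ autos, q = pvF1 phi p ∨ q = pvF2 phi p

def pvReach (autos : List (List Int)) : (Int × Int) → (Int × Int) → Prop :=
  Relation.ReflTransGen (pvStep autos)

structure PvCtx (autos : List (List Int)) (P : List (Int × Int)) : Prop where
  nodup : P.Nodup
  closed : ∀ phi ∈ autos, ∀ p ∈ P, pvF1 phi p ∈ P ∧ pvF2 phi p ∈ P
  inj1 : ∀ phi ∈ autos, ∀ p ∈ P, ∀ q ∈ P, pvF1 phi p = pvF1 phi q → p = q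
  inj2 : ∀ phi ∈ autos, ∀ p ∈ P, ∀ q ∈ P, pvF2 phi p = pvF2 phi q → p = q

lemma pv_mem_UAll {autos : List (List Int)} {P : List (Int × Int)} {x y : Int × Int} :
    (x, y) ∈ pvUAll autos P ↔ ∃ phi ∈ autos, x ∈ P ∧ (y = pvF1 phi x ∨ y = pvF2 phi x) := by
  simp only [pvUAll, List.mem_flatMap, List.mem_cons]
  constructor
  · rintro ⟨phi, hphi, p, hp, h | h | h⟩ <;> try cases h
    · exact ⟨phi, hphi, hp, Or.inl rfl⟩
    · exact ⟨phi, hphi, hp, Or.inr rfl⟩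
  · rintro ⟨phi, hphi, hx, h | h⟩
    · exact ⟨phi, hphi, x, hx, Or.inl (by rw [h])⟩
    · exact ⟨phi, hphi, x, hx, Or.inr (Or.inl (by rw [h]))⟩

lemma pv_step_mem {autos : List (List Int)} {P : List (Int × Int)} (ctx : PvCtx autos P)
    {p q : Int × Int} (hp : p ∈ P) (h : pvStep autos p q) : q ∈ P := by
  obtain ⟨phi, hphi, h | h⟩ := h
  · exact h ▸ (ctx.closed phi hphi p hp).1
  · exact h ▸ (ctx.closed phi hphi p hp).2

lemma pv_reach_mem {autos : List (List Int)} {P : List (Int × Int)} (ctx : PvCtx autos P)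
    {p q : Int × Int} (hp : p ∈ P) (h : pvReach autos p q) : q ∈ P := by
  induction h with
  | refl => exact hp
  | tail _ hstep ih => exact pv_step_mem ctx ih hstep

lemma pv_iter_mem {P : List (Int × Int)} (g : (Int × Int) → (Int × Int))
    (hcl : ∀ p ∈ P, g p ∈ P) {p : Int × Int} (hp : p ∈ P) (i : ℕ) : g^[i] p ∈ P := by
  induction i with
  | zero => simpa using hp
  | succ i ih => rw [Function.iterate_succ_apply']; exact hcl _ ih

lemma pv_iter_cancel {P : List (Int × Int)} (g : (Int × Int) → (Int × Int))
    (hcl : ∀ p ∈ P, g p ∈ P)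
    (hinj : ∀ p ∈ P, ∀ q ∈ P, g p = g q → p = q)
    {p q : Int × Int} (hp : p ∈ P) (hq : q ∈ P) (i : ℕ)
    (h : g^[i] p = g^[i] q) : p = q := by
  induction i with
  | zero => simpa using h
  | succ i ih =>
    rw [Function.iterate_succ_apply', Function.iterate_succ_apply'] at h
    exact ih (hinj _ (pv_iter_mem g hcl hp i) _ (pv_iter_mem g hcl hq i) h)

lemma pv_reach_iter {autos : List (List Int)} {P : List (Int × Int)}
    (g : (Int × Int) → (Int × Int)) (hcl : ∀ p ∈ P, g p ∈ P)
    (hstep : ∀ p ∈ P, pvStep autos p (g p))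
    {p : Int × Int} (hp : p ∈ P) (i : ℕ) : pvReach autos p (g^[i] p) := by
  induction i with
  | zero => simpa using Relation.ReflTransGen.refl
  | succ i ih =>
    rw [Function.iterate_succ_apply']
    exact Relation.ReflTransGen.tail ih (hstep _ (pv_iter_mem g hcl hp i))

lemma pv_inv_gen_aux {autos : List (List Int)} {P : List (Int × Int)}
    (g : (Int × Int) → (Int × Int)) (hcl : ∀ p ∈ P, g p ∈ P)
    (hinj : ∀ p ∈ P, ∀ q ∈ P, g p = g q → p = q)
    (hstep : ∀ p ∈ P, pvStep autos p (g p))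
    {p : Int × Int} (hp : p ∈ P) (i j : ℕ) (hij : i < j)
    (heq : g^[i] p = g^[j] p) : pvReach autos (g p) p := by
  have hfix : p = g^[j - i] p := by
    have : g^[i] p = g^[i] (g^[j - i] p) := by
      rw [← Function.iterate_add_apply]
      rw [show i + (j - i) = j by omega]
      exact heq
    exact pv_iter_cancel g hcl hinj hp (pv_iter_mem g hcl hp _) i this
  have h1 : pvReach autos (g p) (g^[j - i - 1] (g p)) :=
    pv_reach_iter g hcl hstep (hcl p hp) _
  have h2 : g^[j - i - 1] (g p) = p := by
    rw [← Function.iterate_succ_apply,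
      show (j - i - 1).succ = j - i by omega]
    exact hfix.symm
  rwa [h2] at h1

lemma pv_inv_gen {autos : List (List Int)} {P : List (Int × Int)}
    (g : (Int × Int) → (Int × Int)) (hcl : ∀ p ∈ P, g p ∈ P)
    (hinj : ∀ p ∈ P, ∀ q ∈ P, g p = g q → p = q)
    (hstep : ∀ p ∈ P, pvStep autos p (g p))
    {p : Int × Int} (hp : p ∈ P) : pvReach autos (g p) p := by
  obtain ⟨i, hi, j, hj, hne, heq⟩ :
      ∃ i ∈ Finset.range (P.length + 1), ∃ j ∈ Finset.range (P.length + 1),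
        i ≠ j ∧ g^[i] p = g^[j] p := by
    have hmaps : ∀ i ∈ Finset.range (P.length + 1), g^[i] p ∈ P.toFinset := by
      intro i _; exact List.mem_toFinset.2 (pv_iter_mem g hcl hp i)
    have hcard : P.toFinset.card < (Finset.range (P.length + 1)).card := by
      have := List.toFinset_card_le P
      simpa using Nat.lt_succ_of_le this
    obtain ⟨i, hi, j, hj, hne, heq⟩ :=
      Finset.exists_ne_map_eq_of_card_lt_of_maps_to hcard hmaps
    exact ⟨i, hi, j, hj, hne, heq⟩
  rcases Nat.lt_or_ge i j with hij | hij
  · exact pv_inv_gen_aux g hcl hinj hstep hp i j hij heq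
  · have hji : j < i := by omega
    exact pv_inv_gen_aux g hcl hinj hstep hp j i hji heq.symm

lemma pv_step_symm {autos : List (List Int)} {P : List (Int × Int)} (ctx : PvCtx autos P)
    {p q : Int × Int} (hp : p ∈ P) (h : pvStep autos p q) : pvReach autos q p := by
  obtain ⟨phi, hphi, h1 | h2⟩ := h
  · subst h1
    exact pv_inv_gen (pvF1 phi) (fun r hr => (ctx.closed phi hphi r hr).1)
      (fun r hr s hs => ctx.inj1 phi hphi r hr s hs)
      (fun r _ => ⟨phi, hphi, Or.inl rfl⟩) hp
  · subst h2
    exact pv_inv_gen (pvF2 phi) (fun r hr => (ctx.closed phi hphi r hr).2)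
      (fun r hr s hs => ctx.inj2 phi hphi r hr s hs)
      (fun r _ => ⟨phi, hphi, Or.inr rfl⟩) hp

lemma pv_reach_symm {autos : List (List Int)} {P : List (Int × Int)} (ctx : PvCtx autos P)
    {p q : Int × Int} (hp : p ∈ P) (h : pvReach autos p q) : pvReach autos q p := by
  induction h with
  | refl => exact Relation.ReflTransGen.refl
  | tail hr hstep ih =>
    exact Relation.ReflTransGen.trans
      (pv_step_symm ctx (pv_reach_mem ctx hp hr) hstep) ih

lemma pv_E_iff_reach {autos : List (List Int)} {P : List (Int × Int)} (ctx : PvCtx autos P)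
    {p q : Int × Int} (hp : p ∈ P) : pvE autos P p q ↔ pvReach autos p q := by
  constructor
  · intro h
    -- pvE is contained in the equivalence relation S
    suffices hS : ∀ x y : Int × Int, pvE autos P x y →
        ((x ∈ P ∧ y ∈ P ∧ pvReach autos x y) ∨ x = y) by
      rcases hS p q h with ⟨_, _, hr⟩ | rfl
      · exact hr
      · exact Relation.ReflTransGen.refl
    intro x y h
    induction h with
    | rel a b hab =>
      obtain ⟨phi, hphi, ha, hb⟩ := pv_mem_UAll.1 hab
      have hstep : pvStep autos a b := ⟨phi, hphi, hb⟩
      exact Or.inl ⟨ha, pv_step_mem ctx ha hstep, Relation.ReflTransGen.single hstep⟩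
    | refl a => exact Or.inr rfl
    | symm a b _ ih =>
      rcases ih with ⟨ha, hb, hr⟩ | rfl
      · exact Or.inl ⟨hb, ha, pv_reach_symm ctx ha hr⟩
      · exact Or.inr rfl
    | trans a b c _ _ ih1 ih2 =>
      rcases ih1 with ⟨ha, hb, hr1⟩ | rfl
      · rcases ih2 with ⟨_, hc, hr2⟩ | rfl
        · exact Or.inl ⟨ha, hc, hr1.trans hr2⟩
        · exact Or.inl ⟨ha, hb, hr1⟩
      · exact ih2
  · intro h
    induction h with
    | refl => exact Relation.EqvGen.refl p
    | @tail b c hr hstep ih =>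
      have hb : b ∈ P := pv_reach_mem ctx hp hr
      obtain ⟨phi, hphi, hbc⟩ := hstep
      exact Relation.EqvGen.trans _ _ _ ih
        (Relation.EqvGen.rel _ _ (pv_mem_UAll.2 ⟨phi, hphi, hb, hbc⟩))


-- ---------- A-side: parent maps and root chains ----------
def pvLp (par : PySem.Dict (Int × Int) (Int × Int)) (x : Int × Int) : Int × Int :=
  par.getD x x

inductive PvChain (par : PySem.Dict (Int × Int) (Int × Int)) :
    (Int × Int) → List (Int × Int) → (Int × Int) → Prop
  | root (x : Int × Int) (h : pvLp par x = x) : PvChain par x [] x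
  | step (x : Int × Int) (l : List (Int × Int)) (r : Int × Int)
      (h : pvLp par x ≠ x) (hc : PvChain par (pvLp par x) l r) :
      PvChain par x (x :: l) r

def PvRootp (par : PySem.Dict (Int × Int) (Int × Int)) (x r : Int × Int) : Prop :=
  ∃ l, PvChain par x l r

def PvInv (P : List (Int × Int)) (par : PySem.Dict (Int × Int) (Int × Int)) : Prop :=
  par.keys = P ∧ (∀ z ∈ P, pvLp par z ∈ P) ∧ (∀ z ∈ P, ∃ l r, PvChain par z l r)

lemma pv_chain_unique {par : PySem.Dict (Int × Int) (Int × Int)}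
    {x : Int × Int} {l l' : List (Int × Int)} {r r' : Int × Int}
    (h1 : PvChain par x l r) (h2 : PvChain par x l' r') : l = l' ∧ r = r' := by
  induction h1 generalizing l' r' with
  | root x h =>
    cases h2 with
    | root _ _ => exact ⟨rfl, rfl⟩
    | step _ _ _ h' _ => exact absurd h h'
  | step x l r h hc ih =>
    cases h2 with
    | root _ h' => exact absurd h' h
    | step _ l' r' h' hc' =>
      obtain ⟨h1, h2⟩ := ih hc'
      exact ⟨by rw [h1], h2⟩

lemma pv_chain_root_fix {par : PySem.Dict (Int × Int) (Int × Int)}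
    {x : Int × Int} {l : List (Int × Int)} {r : Int × Int}
    (h : PvChain par x l r) : pvLp par r = r := by
  induction h with
  | root _ h => exact h
  | step _ _ _ _ _ ih => exact ih

lemma pv_chain_self_mem {par : PySem.Dict (Int × Int) (Int × Int)}
    {x : Int × Int} {l : List (Int × Int)} {r : Int × Int}
    (h : PvChain par x l r) : x ∈ l ++ [r] := by
  cases h with
  | root _ _ => simp
  | step _ _ _ _ _ => simp

lemma pv_chain_sub {par : PySem.Dict (Int × Int) (Int × Int)}
    {x : Int × Int} {l : List (Int × Int)} {r : Int × Int}
    (h : PvChain par x l r) : ∀ y ∈ l, ∃ ly, PvChain par y ly r ∧ ly.length ≤ l.length := by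
  induction h with
  | root _ _ => intro y hy; simp at hy
  | step x l r hx hc ih =>
    intro y hy
    rcases List.mem_cons.1 hy with rfl | hy
    · exact ⟨y :: l, PvChain.step y l r hx hc, le_refl _⟩
    · obtain ⟨ly, h1, h2⟩ := ih y hy
      exact ⟨ly, h1, by simp; omega⟩

lemma pv_chain_nodup {par : PySem.Dict (Int × Int) (Int × Int)}
    {x : Int × Int} {l : List (Int × Int)} {r : Int × Int}
    (h : PvChain par x l r) : (l ++ [r]).Nodup := by
  induction h with
  | root _ _ => simp
  | step x l r hx hc ih =>
    simp only [List.cons_append, List.nodup_cons]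
    refine ⟨?_, ih⟩
    intro hmem
    rcases List.mem_append.1 hmem with hxl | hxr
    · obtain ⟨ly, h1, h2⟩ := pv_chain_sub hc x hxl
      obtain ⟨heq, -⟩ := pv_chain_unique h1 (PvChain.step x l r hx hc)
      subst heq
      simp at h2
    · simp at hxr
      subst hxr
      exact hx (pv_chain_root_fix hc)

lemma pv_chain_memP {P : List (Int × Int)} {par : PySem.Dict (Int × Int) (Int × Int)}
    (hcl : ∀ z ∈ P, pvLp par z ∈ P) {x : Int × Int} {l : List (Int × Int)} {r : Int × Int}
    (hx : x ∈ P) (h : PvChain par x l r) : ∀ y ∈ l ++ [r], y ∈ P := by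
  induction h with
  | root x _ => intro y hy; simp at hy; subst hy; exact hx
  | step x l r hstep hc ih =>
    intro y hy
    simp only [List.cons_append, List.mem_cons] at hy
    rcases hy with rfl | hy'
    · exact hx
    · exact ih (hcl x hx) y (by simpa using hy')

lemma pv_chain_len_le {P : List (Int × Int)} {par : PySem.Dict (Int × Int) (Int × Int)}
    (hcl : ∀ z ∈ P, pvLp par z ∈ P)
    {x : Int × Int} {l : List (Int × Int)} {r : Int × Int}
    (hx : x ∈ P) (h : PvChain par x l r) : l.length + 1 ≤ P.length := by
  have hnd := pv_chain_nodup h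
  have hsub : (l ++ [r]) ⊆ P := fun y hy => pv_chain_memP hcl hx h y hy
  have := List.Subperm.length_le (List.subperm_of_subset hnd hsub)
  simpa using this

lemma pv_lp_insert (par : PySem.Dict (Int × Int) (Int × Int)) (x v y : Int × Int) :
    pvLp (par.insert x v) y = if y = x then v else pvLp par y := by
  unfold pvLp
  rw [PySem.Dict.getD_insert]

lemma pv_lp_of_not_mem {par : PySem.Dict (Int × Int) (Int × Int)} {z : Int × Int}
    (h : z ∉ par.keys) : pvLp par z = z := by
  unfold pvLp
  refine PySem.Dict.getD_of_not_contains par z ?_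
  by_contra hc
  simp only [Bool.not_eq_false] at hc
  exact h ((PySem.Dict.contains_iff_mem_keys par z).1 hc)

lemma pv_compress {par : PySem.Dict (Int × Int) (Int × Int)} {x : Int × Int}
    (hx : pvLp par x ≠ x)
    {z : Int × Int} {lz : List (Int × Int)} {rz : Int × Int}
    (h : PvChain par z lz rz) :
    ∃ lz', lz'.Sublist lz ∧
      PvChain (par.insert x (pvLp par (pvLp par x))) z lz' rz := by
  induction h with
  | root z hz =>
    have hzx : z ≠ x := by rintro rfl; exact hx hz
    refine ⟨[], List.Sublist.refl _, PvChain.root z ?_⟩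
    rw [pv_lp_insert, if_neg hzx]; exact hz
  | step z l r hz hc ih =>
    obtain ⟨l', hsub, hc'⟩ := ih
    by_cases hzx : z = x
    · subst hzx
      have hfull : PvChain par z (z :: l) r := PvChain.step z l r hz hc
      have hnd := pv_chain_nodup hfull
      have hznotin : z ∉ l ++ [r] := by
        simp only [List.cons_append, List.nodup_cons] at hnd
        exact hnd.1
      cases hc with
      | root _ hroot =>
        have hstep1 : pvLp (par.insert z (pvLp par (pvLp par z))) z = pvLp par z := by
          rw [pv_lp_insert, if_pos rfl, hroot]
        refine ⟨[z], by simp, ?_⟩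
        refine PvChain.step z [] (pvLp par z) (by rw [hstep1]; exact hz) ?_
        rw [hstep1]
        have hl' : l' = [] := List.sublist_nil.1 hsub
        exact hl' ▸ hc'
      | step _ l2 _ hpxne hc2 =>
        have hpxmem : pvLp par z ∈ (pvLp par z :: l2) ++ [r] := by simp
        have hzpx : z ≠ pvLp par z := by
          intro hcontra; exact hznotin (hcontra ▸ hpxmem)
        have hlpp : pvLp (par.insert z (pvLp par (pvLp par z))) (pvLp par z)
            = pvLp par (pvLp par z) := by
          rw [pv_lp_insert, if_neg (Ne.symm hzpx)]
        cases hc' with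
        | root _ hroot2 =>
          rw [hlpp] at hroot2
          exact absurd hroot2 hpxne
        | step _ l1' _ hne2 hc2' =>
          rw [hlpp] at hc2'
          have hppxmem : pvLp par (pvLp par z) ∈ l2 ++ [r] := pv_chain_self_mem hc2
          have hppxz : pvLp par (pvLp par z) ≠ z := by
            intro hcontra
            apply hznotin
            have h0 : (z : Int × Int) ∈ l2 ++ [r] := hcontra ▸ hppxmem
            simp only [List.cons_append, List.mem_cons]
            exact Or.inr (by simpa using h0)
          have hlpz : pvLp (par.insert z (pvLp par (pvLp par z))) z
              = pvLp par (pvLp par z) := by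
            rw [pv_lp_insert, if_pos rfl]
          refine ⟨z :: l1', ?_, ?_⟩
          · exact List.Sublist.cons₂ z ((List.sublist_cons_self _ _).trans hsub)
          · refine PvChain.step z l1' r (by rw [hlpz]; exact hppxz) ?_
            rw [hlpz]
            exact hc2'
    · refine ⟨z :: l', List.Sublist.cons₂ z hsub, ?_⟩
      have hlpz : pvLp (par.insert x (pvLp par (pvLp par x))) z = pvLp par z := by
        rw [pv_lp_insert, if_neg hzx]
      refine PvChain.step z l' r (by rw [hlpz]; exact hz) ?_
      rw [hlpz]
      exact hc'

lemma pv_compress_inv {P : List (Int × Int)} {par : PySem.Dict (Int × Int) (Int × Int)}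
    (hinv : PvInv P par) {x : Int × Int} (hx : pvLp par x ≠ x) :
    PvInv P (par.insert x (pvLp par (pvLp par x))) := by
  obtain ⟨hkeys, hcl, hch⟩ := hinv
  have hxmem : x ∈ P := by
    by_contra hxm
    exact hx (pv_lp_of_not_mem (by rw [hkeys]; exact hxm))
  have hcont : par.contains x = true :=
    (PySem.Dict.contains_iff_mem_keys par x).2 (by rw [hkeys]; exact hxmem)
  refine ⟨by rw [PySem.Dict.keys_insert_of_contains par _ hcont]; exact hkeys, ?_, ?_⟩
  · intro z hz
    rw [pv_lp_insert]
    split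
    · exact hcl _ (hcl _ hxmem)
    · exact hcl _ hz
  · intro z hz
    obtain ⟨l, r, hchain⟩ := hch z hz
    obtain ⟨l', _, hchain'⟩ := pv_compress hx hchain
    exact ⟨l', r, hchain'⟩

lemma pv_inv_total {P : List (Int × Int)} {par : PySem.Dict (Int × Int) (Int × Int)}
    (hinv : PvInv P par) : ∀ z, ∃ l r, PvChain par z l r := by
  intro z
  by_cases hz : z ∈ P
  · exact hinv.2.2 z hz
  · exact ⟨[], z, PvChain.root z (pv_lp_of_not_mem (by rw [hinv.1]; exact hz))⟩

lemma pv_findF_spec {P : List (Int × Int)} :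
    ∀ (f : Nat) (par : PySem.Dict (Int × Int) (Int × Int)) (x : Int × Int)
      (l : List (Int × Int)) (r : Int × Int),
    PvInv P par → PvChain par x l r → l.length < f →
    (pvFindF f par x).1 = r ∧ PvInv P (pvFindF f par x).2 ∧
      (∀ z lz rz, PvChain par z lz rz →
        ∃ lz', lz'.Sublist lz ∧ PvChain (pvFindF f par x).2 z lz' rz) := by
  intro f
  induction f with
  | zero => intro par x l r _ _ hlt; omega
  | succ f ih =>
    intro par x l r hinv hchain hlt
    by_cases hroot : par.getD x x = x
    · have heq : pvFindF (f + 1) par x = (x, par) := by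
        simp [pvFindF, hroot]
      rw [heq]
      cases hchain with
      | root _ _ => exact ⟨rfl, hinv, fun z lz rz h => ⟨lz, List.Sublist.refl _, h⟩⟩
      | step _ _ _ hne _ => exact absurd hroot hne
    · cases hchain with
      | root _ h => exact absurd h hroot
      | step _ l0 _ hne hc =>
        have heq : pvFindF (f + 1) par x =
            pvFindF f (par.insert x (par.getD (par.getD x x) (par.getD x x)))
              (par.getD (par.getD x x) (par.getD x x)) := by
          simp only [pvFindF, if_neg hroot]
        have hval : par.getD (par.getD x x) (par.getD x x) = pvLp par (pvLp par x) := rfl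
        have hinv' := pv_compress_inv hinv hne
        obtain ⟨l0', hsub0, hc0'⟩ := pv_compress hne hc
        rw [heq, hval]
        cases hc with
        | root _ hroot2 =>
          -- parent of x is a root: the jump target is that root itself
          have hl0 : l0' = [] := List.sublist_nil.1 hsub0
          subst hl0
          have hchain' : PvChain (par.insert x (pvLp par (pvLp par x)))
              (pvLp par (pvLp par x)) [] (pvLp par x) := by
            set D := par.insert x (pvLp par (pvLp par x)) with hD
            rw [hroot2]
            exact hc0'
          have hgoal := ih (par.insert x (pvLp par (pvLp par x))) (pvLp par (pvLp par x))
            [] (pvLp par x) hinv' hchain' (by simp at hlt ⊢; omega)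
          refine ⟨hgoal.1, hgoal.2.1, ?_⟩
          intro z lz rz h
          obtain ⟨lz1, hs1, h1⟩ := pv_compress hne h
          obtain ⟨lz2, hs2, h2⟩ := hgoal.2.2 z lz1 rz h1
          exact ⟨lz2, hs2.trans hs1, h2⟩
        | step _ l1 _ hpx2 hc2 =>
          -- invert the compressed chain of the parent
          have hpxx : pvLp par x ≠ x := hne
          have hlpp : pvLp (par.insert x (pvLp par (pvLp par x))) (pvLp par x)
              = pvLp par (pvLp par x) := by
            rw [pv_lp_insert, if_neg (fun hh => hpxx hh)]
          cases hc0' with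
          | root _ hroot3 =>
            rw [hlpp] at hroot3
            exact absurd hroot3 hpx2
          | step _ l1' _ hne3 hc3 =>
            rw [hlpp] at hc3
            have hlen : l1'.length < f := by
              have h1 : l1'.length + 1 = (pvLp par x :: l1').length := by simp
              have h2 : (pvLp par x :: l1').length ≤ (pvLp par x :: l1).length :=
                hsub0.length_le
              simp at h2 hlt
              omega
            have hgoal := ih (par.insert x (pvLp par (pvLp par x))) (pvLp par (pvLp par x))
              l1' r hinv' hc3 hlen
            refine ⟨hgoal.1, hgoal.2.1, ?_⟩
            intro z lz rz h
            obtain ⟨lz1, hs1, h1⟩ := pv_compress hne h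
            obtain ⟨lz2, hs2, h2⟩ := hgoal.2.2 z lz1 rz h1
            exact ⟨lz2, hs2.trans hs1, h2⟩

lemma pv_rootp_unique {par : PySem.Dict (Int × Int) (Int × Int)} {z r1 r2 : Int × Int}
    (h1 : PvRootp par z r1) (h2 : PvRootp par z r2) : r1 = r2 := by
  obtain ⟨l1, hc1⟩ := h1
  obtain ⟨l2, hc2⟩ := h2
  exact (pv_chain_unique hc1 hc2).2

lemma pv_find_run {P : List (Int × Int)} {par : PySem.Dict (Int × Int) (Int × Int)}
    (hinv : PvInv P par) {x : Int × Int} {l : List (Int × Int)} {r : Int × Int}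
    (hx : x ∈ P) (hchain : PvChain par x l r) :
    (pvFind par x).1 = r ∧ PvInv P (pvFind par x).2 ∧
      (∀ z rz, PvRootp par z rz ↔ PvRootp (pvFind par x).2 z rz) := by
  have hsize : par.size = P.length := by
    have h0 : par.keys.length = P.length := by rw [hinv.1]
    simpa [PySem.Dict.size, PySem.Dict.keys] using h0
  have hlen : l.length < par.size + 1 := by
    have := pv_chain_len_le hinv.2.1 hx hchain
    omega
  obtain ⟨h1, h2, h3⟩ := pv_findF_spec (par.size + 1) par x l r hinv hchain hlen
  refine ⟨h1, h2, ?_⟩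
  intro z rz
  constructor
  · rintro ⟨lz, hlz⟩
    obtain ⟨lz', _, h⟩ := h3 z lz rz hlz
    exact ⟨lz', h⟩
  · rintro ⟨lz', hlz'⟩
    obtain ⟨l2, r2, h4⟩ := pv_inv_total hinv z
    obtain ⟨l2', _, h5⟩ := h3 z l2 r2 h4
    obtain ⟨-, hreq⟩ := pv_chain_unique hlz' h5
    rw [hreq]
    exact ⟨l2, h4⟩

lemma pv_link {par : PySem.Dict (Int × Int) (Int × Int)} {rx0 ry0 : Int × Int}
    (hrx : pvLp par rx0 = rx0) (hry : pvLp par ry0 = ry0) (hne : rx0 ≠ ry0)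
    {z : Int × Int} {lz : List (Int × Int)} {rz : Int × Int}
    (h : PvChain par z lz rz) :
    PvChain (par.insert rx0 ry0) z (if rz = rx0 then lz ++ [rx0] else lz)
      (if rz = rx0 then ry0 else rz) := by
  induction h with
  | root z hz =>
    by_cases hzr : z = rx0
    · subst hzr
      rw [if_pos rfl, if_pos rfl, List.nil_append]
      refine PvChain.step z [] ry0 ?_ ?_
      · rw [pv_lp_insert, if_pos rfl]; exact Ne.symm (by simpa using hne)
      · rw [pv_lp_insert, if_pos rfl]
        refine PvChain.root ry0 ?_
        rw [pv_lp_insert, if_neg (Ne.symm hne)]; exact hry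
    · simp only [if_neg hzr]
      refine PvChain.root z ?_
      rw [pv_lp_insert, if_neg hzr]; exact hz
  | step z l r hz hc ih =>
    have hzr : z ≠ rx0 := by
      rintro rfl; exact hz hrx
    have hlpz : pvLp (par.insert rx0 ry0) z = pvLp par z := by
      rw [pv_lp_insert, if_neg hzr]
    by_cases hrr : r = rx0
    · simp only [if_pos hrr] at ih ⊢
      refine PvChain.step z (l ++ [rx0]) ry0 (by rw [hlpz]; exact hz) ?_
      rw [hlpz]
      exact ih
    · simp only [if_neg hrr] at ih ⊢
      refine PvChain.step z l r (by rw [hlpz]; exact hz) ?_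
      rw [hlpz]
      exact ih

lemma pv_union_spec {P : List (Int × Int)} {par : PySem.Dict (Int × Int) (Int × Int)}
    (hinv : PvInv P par) {x y : Int × Int} (hx : x ∈ P) (hy : y ∈ P) :
    PvInv P (pvUnion par x y) ∧
      (∀ z rz rx ry, PvRootp par z rz → PvRootp par x rx → PvRootp par y ry →
        PvRootp (pvUnion par x y) z (if rz = rx then ry else rz)) := by
  obtain ⟨lx, rx0, hcx⟩ := hinv.2.2 x hx
  obtain ⟨hfx1, hinv1, hiff1⟩ := pv_find_run hinv hx hcx
  obtain ⟨ry0, hry0⟩ : ∃ r, PvRootp (pvFind par x).2 y r := by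
    obtain ⟨ly, ry, hcy⟩ := hinv.2.2 y hy
    exact ⟨ry, (hiff1 y ry).1 ⟨ly, hcy⟩⟩
  have hry0c := hry0
  obtain ⟨ly1, hcy1⟩ := hry0c
  obtain ⟨hfy1, hinv2, hiff2⟩ := pv_find_run hinv1 hy hcy1
  set par1 := (pvFind par x).2 with hpar1
  set par2 := (pvFind par1 y).2 with hpar2
  have hrootx2 : PvRootp par2 x rx0 := (hiff2 x rx0).1 ((hiff1 x rx0).1 ⟨lx, hcx⟩)
  have hrooty2 : PvRootp par2 y ry0 := (hiff2 y ry0).1 ⟨ly1, hcy1⟩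
  have hroots : ∀ z rz, PvRootp par z rz → PvRootp par2 z rz := by
    intro z rz h
    exact (hiff2 z rz).1 ((hiff1 z rz).1 h)
  have hunfold : pvUnion par x y = if rx0 ≠ ry0 then par2.insert rx0 ry0 else par2 := by
    show (if (pvFind par x).1 ≠ (pvFind par1 y).1 then _ else _) = _
    rw [hfx1, hfy1]
  by_cases hne : rx0 = ry0
  · rw [hunfold, if_neg (by simpa using hne)]
    refine ⟨hinv2, ?_⟩
    intro z rz rx ry hz hxr hyr
    have hrx : rx = rx0 := pv_rootp_unique (hroots x rx hxr) hrootx2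
    have hry : ry = ry0 := pv_rootp_unique (hroots y ry hyr) hrooty2
    rw [hrx, hry]
    have h2 := hroots z rz hz
    by_cases hcz : rz = rx0
    · rw [if_pos hcz, ← hne, ← hcz]
      exact h2
    · rw [if_neg hcz]
      exact h2
  · rw [hunfold, if_pos (by simpa using hne)]
    -- rx0 and ry0 are roots of par2
    have hfixx : pvLp par2 rx0 = rx0 := by
      obtain ⟨l2, hc2⟩ := hrootx2
      exact pv_chain_root_fix hc2
    have hfixy : pvLp par2 ry0 = ry0 := by
      obtain ⟨l2, hc2⟩ := hrooty2
      exact pv_chain_root_fix hc2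
    have hxmem : rx0 ∈ P := by
      obtain ⟨l2, hc2⟩ := hrootx2
      have := pv_chain_memP hinv2.2.1 hx hc2 rx0 (by simp)
      exact this
    have hymem : ry0 ∈ P := by
      obtain ⟨l2, hc2⟩ := hrooty2
      exact pv_chain_memP hinv2.2.1 hy hc2 ry0 (by simp)
    have hcont : par2.contains rx0 = true :=
      (PySem.Dict.contains_iff_mem_keys par2 rx0).2 (by rw [hinv2.1]; exact hxmem)
    constructor
    · refine ⟨by rw [PySem.Dict.keys_insert_of_contains par2 _ hcont]; exact hinv2.1, ?_, ?_⟩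
      · intro z hz
        rw [pv_lp_insert]
        split
        · exact hymem
        · exact hinv2.2.1 z hz
      · intro z hz
        obtain ⟨lz, rz, hcz⟩ := hinv2.2.2 z hz
        exact ⟨_, _, pv_link hfixx hfixy hne hcz⟩
    · intro z rz rx ry hz hxr hyr
      have hrx : rx = rx0 := pv_rootp_unique (hroots x rx hxr) hrootx2
      have hry : ry = ry0 := pv_rootp_unique (hroots y ry hyr) hrooty2
      rw [hrx, hry]
      obtain ⟨lz, hcz⟩ := hroots z rz hz
      exact ⟨_, pv_link hfixx hfixy hne hcz⟩

def PvGood (autos : List (List Int)) (P : List (Int × Int))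
    (par : PySem.Dict (Int × Int) (Int × Int)) : Prop :=
  PvInv P par ∧ ∀ z ∈ P, ∀ r, PvRootp par z r → pvE autos P z r

lemma pv_unions_fold {autos : List (List Int)} {P : List (Int × Int)} :
    ∀ (U : List ((Int × Int) × (Int × Int)))
      (par : PySem.Dict (Int × Int) (Int × Int)),
    PvGood autos P par →
    (∀ uv ∈ U, uv.1 ∈ P ∧ uv.2 ∈ P ∧ pvE autos P uv.1 uv.2) →
    PvGood autos P (U.foldl (fun par uv => pvUnion par uv.1 uv.2) par) ∧
      (∀ uv ∈ U, ∃ r, PvRootp (U.foldl (fun par uv => pvUnion par uv.1 uv.2) par) uv.1 r ∧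
        PvRootp (U.foldl (fun par uv => pvUnion par uv.1 uv.2) par) uv.2 r) ∧
      (∀ u v, (∃ r, PvRootp par u r ∧ PvRootp par v r) →
        ∃ r', PvRootp (U.foldl (fun par uv => pvUnion par uv.1 uv.2) par) u r' ∧
          PvRootp (U.foldl (fun par uv => pvUnion par uv.1 uv.2) par) v r') := by
  intro U
  induction U with
  | nil =>
    intro par hgood _
    exact ⟨hgood, by simp, fun u v h => by simpa using h⟩
  | cons ab U ih =>
    intro par hgood hU
    obtain ⟨ha, hb, hEab⟩ := hU ab (List.mem_cons_self)
    obtain ⟨hinv, hEroot⟩ := hgood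
    obtain ⟨hinv1, hform⟩ := pv_union_spec hinv ha hb
    obtain ⟨la, ra, hca⟩ := pv_inv_total hinv ab.1
    obtain ⟨lb, rb, hcb⟩ := pv_inv_total hinv ab.2
    have hra : PvRootp par ab.1 ra := ⟨la, hca⟩
    have hrb : PvRootp par ab.2 rb := ⟨lb, hcb⟩
    -- the new parent is good
    have hgood1 : PvGood autos P (pvUnion par ab.1 ab.2) := by
      refine ⟨hinv1, ?_⟩
      intro z hz r hr
      obtain ⟨lz, rz, hcz⟩ := hinv.2.2 z hz
      have hrz : PvRootp par z rz := ⟨lz, hcz⟩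
      have h1 := hform z rz ra rb hrz hra hrb
      have h2 : r = if rz = ra then rb else rz := pv_rootp_unique hr h1
      have hEz : pvE autos P z rz := hEroot z hz rz hrz
      by_cases hcase : rz = ra
      · rw [h2, if_pos hcase]
        -- z ~ rz = ra ~ a ~ b ~ rb
        have hEa : pvE autos P ab.1 ra := hEroot ab.1 ha ra hra
        have hEb : pvE autos P ab.2 rb := hEroot ab.2 hb rb hrb
        exact Relation.EqvGen.trans _ _ _ (hcase ▸ hEz)
          (Relation.EqvGen.trans _ _ _ (Relation.EqvGen.symm _ _ hEa)
            (Relation.EqvGen.trans _ _ _ hEab hEb))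
      · rw [h2, if_neg hcase]
        exact hEz
    obtain ⟨hG, hC2, hC3⟩ := ih (pvUnion par ab.1 ab.2) hgood1
      (fun uv huv => hU uv (List.mem_cons_of_mem _ huv))
    refine ⟨by simpa using hG, ?_, ?_⟩
    · intro uv huv
      rcases List.mem_cons.1 huv with rfl | huv'
      · -- the pair just united has a common root in the new parent
        have h1 : PvRootp (pvUnion par uv.1 uv.2) uv.1 (if ra = ra then rb else ra) :=
          hform uv.1 ra ra rb hra hra hrb
        have h2 : PvRootp (pvUnion par uv.1 uv.2) uv.2 (if rb = ra then rb else rb) :=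
          hform uv.2 rb ra rb hrb hra hrb
        rw [if_pos rfl] at h1
        have h2' : PvRootp (pvUnion par uv.1 uv.2) uv.2 rb := by
          by_cases hc : rb = ra
          · rwa [if_pos hc] at h2
          · rwa [if_neg hc] at h2
        have := hC3 uv.1 uv.2 ⟨rb, h1, h2'⟩
        simpa using this
      · simpa using hC2 uv huv'
    · intro u v huv
      obtain ⟨r, hu, hv⟩ := huv
      obtain ⟨lu', ru', hcu'⟩ := pv_inv_total hinv u
      have h1 := hform u r ra rb hu hra hrb
      have h2 := hform v r ra rb hv hra hrb
      have := hC3 u v ⟨if r = ra then rb else r, h1, h2⟩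
      simpa using this

def pvParent0 (P : List (Int × Int)) : PySem.Dict (Int × Int) (Int × Int) :=
  P.foldl (fun d p => d.insert p p) PySem.Dict.empty

lemma pv_parent0_items {P : List (Int × Int)} (hnd : P.Nodup) :
    (pvParent0 P).items = P.map (fun p => (p, p)) := by
  unfold pvParent0
  have := PySem.Dict.items_foldl_insert_fresh (d := (PySem.Dict.empty : PySem.Dict (Int × Int) (Int × Int)))
    (l := P) (k := fun p => p) (v := fun p => p)
    (by intro a _; simp [PySem.Dict.contains_empty]) (by simpa using hnd)
  simpa using this

lemma pv_parent0_lp {P : List (Int × Int)} (hnd : P.Nodup) (z : Int × Int) :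
    pvLp (pvParent0 P) z = z := by
  by_cases hz : z ∈ P
  · have hitems : (z, z) ∈ (pvParent0 P).items := by
      rw [pv_parent0_items hnd]
      exact List.mem_map.2 ⟨z, hz, rfl⟩
    have hkeysnd : (pvParent0 P).keys.Nodup := by
      show ((pvParent0 P).items.map Prod.fst).Nodup
      rw [pv_parent0_items hnd]
      have hid : (Prod.fst ∘ fun p : Int × Int => (p, p)) = id := rfl
      rw [List.map_map, hid, List.map_id]
      exact hnd
    unfold pvLp
    exact PySem.Dict.getD_of_mem_items _ hitems hkeysnd z
  · refine pv_lp_of_not_mem ?_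
    show z ∉ (pvParent0 P).items.map Prod.fst
    rw [pv_parent0_items hnd]
    simpa using hz

lemma pv_parent0_good {autos : List (List Int)} {P : List (Int × Int)} (hnd : P.Nodup) :
    PvGood autos P (pvParent0 P) := by
  have hlp := pv_parent0_lp (P := P) hnd
  refine ⟨⟨?_, ?_, ?_⟩, ?_⟩
  · show (pvParent0 P).items.map Prod.fst = P
    rw [pv_parent0_items hnd]
    have hid : (Prod.fst ∘ fun p : Int × Int => (p, p)) = id := rfl
    rw [List.map_map, hid, List.map_id]
  · intro z hz; rw [hlp]; exact hz
  · intro z _; exact ⟨[], z, PvChain.root z (hlp z)⟩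
  · intro z _ r hr
    have : r = z := pv_rootp_unique hr ⟨[], PvChain.root z (hlp z)⟩
    rw [this]
    exact Relation.EqvGen.refl z

def pvParent1 (autos : List (List Int)) (P : List (Int × Int)) :
    PySem.Dict (Int × Int) (Int × Int) :=
  (pvUAll autos P).foldl (fun par uv => pvUnion par uv.1 uv.2) (pvParent0 P)

lemma pv_parent1_char {autos : List (List Int)} {P : List (Int × Int)} (hnd : P.Nodup)
    (hcl : ∀ phi ∈ autos, ∀ p ∈ P, pvF1 phi p ∈ P ∧ pvF2 phi p ∈ P) :
    PvGood autos P (pvParent1 autos P) ∧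
      ∀ z w : Int × Int,
        (∃ r, PvRootp (pvParent1 autos P) z r ∧ PvRootp (pvParent1 autos P) w r) ↔
          pvE autos P z w := by
  have hU : ∀ uv ∈ pvUAll autos P, uv.1 ∈ P ∧ uv.2 ∈ P ∧ pvE autos P uv.1 uv.2 := by
    intro uv huv
    obtain ⟨phi, hphi, p, hp, hmem⟩ := by
      simpa only [pvUAll, List.mem_flatMap] using huv
    have h1 : uv = (p, pvF1 phi p) ∨ uv = (p, pvF2 phi p) := by
      simpa using hmem
    have hE : pvE autos P uv.1 uv.2 := by
      refine Relation.EqvGen.rel _ _ ?_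
      have : (uv.1, uv.2) = uv := rfl
      rw [this]
      exact huv
    rcases h1 with rfl | rfl
    · exact ⟨hp, (hcl phi hphi p hp).1, hE⟩
    · exact ⟨hp, (hcl phi hphi p hp).2, hE⟩
  obtain ⟨hG, hC2, hC3⟩ := pv_unions_fold (pvUAll autos P) (pvParent0 P)
    (pv_parent0_good hnd) hU
  have hGP : PvGood autos P (pvParent1 autos P) := hG
  have hC2' : ∀ uv ∈ pvUAll autos P, ∃ r, PvRootp (pvParent1 autos P) uv.1 r ∧
      PvRootp (pvParent1 autos P) uv.2 r := hC2
  clear hC2 hC3 hG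
  refine ⟨hGP, ?_⟩
  intro z w
  constructor
  · rintro ⟨r, hz, hw⟩
    -- need membership of z and w in P for the E-clause; roots outside P are the point itself
    by_cases hzP : z ∈ P
    · by_cases hwP : w ∈ P
      · exact Relation.EqvGen.trans _ _ _ (hGP.2 z hzP r hz)
          (Relation.EqvGen.symm _ _ (hGP.2 w hwP r hw))
      · -- w ∉ P: its parent chain is trivial, so r = w
        have hw' : PvRootp (pvParent1 autos P) w w :=
          ⟨[], PvChain.root w (pv_lp_of_not_mem (by rw [hGP.1.1]; exact hwP))⟩
        have : r = w := pv_rootp_unique hw hw'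
        subst this
        -- now z has root w; but chains from z ∈ P stay in P, contradiction
        obtain ⟨lz, hcz⟩ := hz
        have := pv_chain_memP hGP.1.2.1 hzP hcz r (by simp)
        exact absurd this hwP
    · have hz' : PvRootp (pvParent1 autos P) z z :=
        ⟨[], PvChain.root z (pv_lp_of_not_mem (by rw [hGP.1.1]; exact hzP))⟩
      have hrz : r = z := pv_rootp_unique hz hz'
      subst hrz
      by_cases hwP : w ∈ P
      · obtain ⟨lw, hcw⟩ := hw
        have := pv_chain_memP hGP.1.2.1 hwP hcw r (by simp)
        exact absurd this hzP
      · have hw' : PvRootp (pvParent1 autos P) w w :=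
          ⟨[], PvChain.root w (pv_lp_of_not_mem (by rw [hGP.1.1]; exact hwP))⟩
      -- r = z and r = w, so z = w
        have : r = w := pv_rootp_unique hw hw'
        rw [← this]
        exact Relation.EqvGen.refl r
  · intro hE
    induction hE with
    | rel a b hab => exact hC2' (a, b) hab
    | refl a =>
      obtain ⟨la, ra, hca⟩ := pv_inv_total hGP.1 a
      exact ⟨ra, ⟨la, hca⟩, ⟨la, hca⟩⟩
    | symm a b _ ihab =>
      obtain ⟨r, h1, h2⟩ := ihab
      exact ⟨r, h2, h1⟩
    | trans a b c _ _ ih1 ih2 =>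
      obtain ⟨r1, h1, h2⟩ := ih1
      obtain ⟨r2, h3, h4⟩ := ih2
      exact ⟨r1, h1, (pv_rootp_unique h3 h2) ▸ h4⟩

def pvR (autos : List (List Int)) (P : List (Int × Int)) (z : Int × Int) : Int × Int :=
  (pvFind (pvParent1 autos P) z).1

lemma pvR_rootp {autos : List (List Int)} {P : List (Int × Int)}
    (hinv : PvInv P (pvParent1 autos P)) {z : Int × Int} (hz : z ∈ P) :
    PvRootp (pvParent1 autos P) z (pvR autos P z) := by
  obtain ⟨l, r, hc⟩ := hinv.2.2 z hz
  obtain ⟨h1, -, -⟩ := pv_find_run hinv hz hc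
  unfold pvR
  rw [h1]
  exact ⟨l, hc⟩

lemma pv_phase2_gen {autos : List (List Int)} {P : List (Int × Int)}
    (hinv1 : PvInv P (pvParent1 autos P)) :
    ∀ (L : List (Int × Int)) (o : PySem.Dict (Int × Int) (List (Int × Int)))
      (par : PySem.Dict (Int × Int) (Int × Int)),
    (∀ v ∈ L, v ∈ P) → PvInv P par →
    (∀ z r, PvRootp (pvParent1 autos P) z r ↔ PvRootp par z r) →
    (L.foldl (fun st v => (st.1.modify (pvFind st.2 v).1 [] (· ++ [v]), (pvFind st.2 v).2))
        (o, par)).1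
      = L.foldl (fun o v => o.modify (pvR autos P v) [] (· ++ [v])) o := by
  intro L
  induction L with
  | nil => intro o par _ _ _; rfl
  | cons v L ih =>
    intro o par hL hinv hiff
    have hv : v ∈ P := hL v List.mem_cons_self
    obtain ⟨l, r, hc⟩ := hinv.2.2 v hv
    obtain ⟨h1, h2, h3⟩ := pv_find_run hinv hv hc
    have hrv : r = pvR autos P v := by
      refine pv_rootp_unique ?_ (pvR_rootp hinv1 hv)
      exact (hiff v r).2 ⟨l, hc⟩
    have hiff' : ∀ z rz, PvRootp (pvParent1 autos P) z rz ↔ PvRootp (pvFind par v).2 z rz :=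
      fun z rz => (hiff z rz).trans (h3 z rz)
    simp only [List.foldl_cons]
    rw [show (pvFind par v).1 = pvR autos P v from hrv ▸ h1]
    exact ih (o.modify (pvR autos P v) [] (· ++ [v])) (pvFind par v).2
      (fun w hw => hL w (List.mem_cons_of_mem _ hw)) h2 hiff'

lemma pv_groups_items {P : List (Int × Int)} (R : (Int × Int) → (Int × Int)) :
    (P.foldl (fun o v => o.modify (R v) [] (· ++ [v]))
        (PySem.Dict.empty : PySem.Dict (Int × Int) (List (Int × Int)))).items
      = (PySem.List.dedup (P.map R)).map
          (fun r => (r, P.filter (fun v => R v == r))) := by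
  have hfold : P.foldl (fun o v => o.modify (R v) [] (· ++ [v]))
      (PySem.Dict.empty : PySem.Dict (Int × Int) (List (Int × Int)))
      = (P.map (fun v => (R v, v))).foldl (fun d p => d.modify p.1 [] (· ++ [p.2]))
        PySem.Dict.empty := by
    rw [List.foldl_map]
  have hkeys : (P.foldl (fun o v => o.modify (R v) [] (· ++ [v]))
      (PySem.Dict.empty : PySem.Dict (Int × Int) (List (Int × Int)))).keys
      = PySem.List.dedup (P.map R) := by
    have := PySem.Dict.keys_foldl_modify_key (l := P) (key := R)
      (f := fun _ v => (· ++ [v])) (d0 := [])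
      (d := (PySem.Dict.empty : PySem.Dict (Int × Int) (List (Int × Int))))
    rw [this]
    rw [PySem.List.dedup_eq_ofList]
    simp [PySem.Dict.keys_empty, PySem.Set.update_nil_left]
  have hnodup : (P.foldl (fun o v => o.modify (R v) [] (· ++ [v]))
      (PySem.Dict.empty : PySem.Dict (Int × Int) (List (Int × Int)))).keys.Nodup := by
    refine PySem.Dict.nodup_keys_foldl_modify_key P R [] _ _ ?_
    simp [PySem.Dict.keys_empty]
  have hgetD : ∀ r, (P.foldl (fun o v => o.modify (R v) [] (· ++ [v]))
      (PySem.Dict.empty : PySem.Dict (Int × Int) (List (Int × Int)))).getD r []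
      = P.filter (fun v => R v == r) := by
    intro r
    rw [hfold]
    rw [PySem.Dict.getD_foldl_modify_append]
    rw [PySem.Dict.getD_empty]
    rw [List.filter_map]
    rw [List.map_map]
    have h1 : ((fun x : (Int × Int) × Int × Int => x.2) ∘ fun v : Int × Int => (R v, v)) = id := rfl
    have h2 : ((fun p : (Int × Int) × Int × Int => p.1 == r) ∘ fun v : Int × Int => (R v, v))
        = fun v => R v == r := rfl
    rw [h1, h2, List.map_id, List.nil_append]
  rw [PySem.Dict.items_eq_map_keys _ hnodup []]
  rw [hkeys]
  exact List.map_congr_left (fun r _ => by rw [hgetD r])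

lemma pv_inner_fold :
    ∀ (cs : List (Int × Int)) (o : PySem.Set (Int × Int)) (s : List (Int × Int)),
    cs.foldl (fun st q => if PySem.Set.contains st.1 q then st
        else (PySem.Set.add st.1 q, st.2 ++ [q])) (o, s)
      = (PySem.Set.update o cs,
         s ++ (PySem.Set.ofList cs).filter (fun y => !(PySem.Set.contains o y))) := by
  intro cs
  induction cs with
  | nil => intro o s; simp [PySem.Set.update_nil, PySem.Set.ofList_nil]
  | cons q cs ih =>
    intro o s
    simp only [List.foldl_cons]
    have hdis : PySem.Set.discard (PySem.Set.ofList cs) q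
        = (PySem.Set.ofList cs).filter (fun y => !(y == q)) := rfl
    by_cases hq : q ∈ o
    · have hqc : PySem.Set.contains o q = true := (PySem.Set.contains_iff o q).2 hq
      rw [if_pos hqc]
      rw [PySem.Set.update_cons, PySem.Set.add_of_mem hq, ih o s]
      refine congrArg _ (congrArg _ ?_)
      rw [PySem.Set.ofList_cons,
        List.filter_cons_of_neg (by simpa using hq), hdis, List.filter_filter]
      refine (List.filter_congr ?_).symm
      intro y hy
      by_cases hyq : y = q
      · subst hyq; simpa using hq
      · simp [hyq]
    · have hqc : PySem.Set.contains o q = false := by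
        by_contra hc
        simp only [Bool.not_eq_false] at hc
        exact hq ((PySem.Set.contains_iff o q).1 hc)
      rw [if_neg (by simpa using hq)]
      have hadd : PySem.Set.add o q = o ++ [q] := PySem.Set.add_of_not_mem hq
      rw [PySem.Set.update_cons, ih (PySem.Set.add o q) (s ++ [q])]
      refine congrArg (Prod.mk _) ?_
      rw [List.append_assoc]
      rw [PySem.Set.ofList_cons, List.filter_cons_of_pos (by simpa using hq)]
      refine congrArg (fun t => s ++ t) ?_
      rw [List.singleton_append]
      refine congrArg (List.cons q) ?_
      rw [hdis, List.filter_filter]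
      refine List.filter_congr ?_
      intro y hy
      by_cases hyq : y = q
      · subst hyq; simp
      · simp [hadd, hyq]

def PvWInv (autos : List (List Int)) (P : List (Int × Int)) (p : Int × Int)
    (orbit : PySem.Set (Int × Int)) (stack : List (Int × Int)) : Prop :=
  orbit.Nodup ∧ (∀ q ∈ orbit, q ∈ P) ∧ p ∈ orbit ∧
    (∀ q ∈ stack, q ∈ orbit) ∧
    (∀ q ∈ orbit, pvReach autos p q) ∧
    (∀ q ∈ orbit, q ∈ stack ∨ ∀ phi ∈ autos, pvF1 phi q ∈ orbit ∧ pvF2 phi q ∈ orbit)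

lemma pv_close_spec {autos : List (List Int)} {P : List (Int × Int)} {p : Int × Int}
    (ctx : PvCtx autos P) :
    ∀ (f : Nat) (orbit : PySem.Set (Int × Int)) (stack : List (Int × Int)),
    PvWInv autos P p orbit stack →
    stack.length + 2 * (P.length - orbit.length) < f →
    (pvClose f autos orbit stack).Nodup ∧
      (∀ q ∈ pvClose f autos orbit stack, q ∈ P) ∧
      p ∈ pvClose f autos orbit stack ∧
      (∀ q ∈ pvClose f autos orbit stack, pvReach autos p q) ∧
      (∀ q ∈ pvClose f autos orbit stack, ∀ phi ∈ autos,
        pvF1 phi q ∈ pvClose f autos orbit stack ∧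
          pvF2 phi q ∈ pvClose f autos orbit stack) := by
  intro f
  induction f with
  | zero => intro orbit stack _ hlt; omega
  | succ f ih =>
    intro orbit stack hw hlt
    obtain ⟨hnd, hsubP, hpmem, hstk, hreach, hclosed⟩ := hw
    rcases List.eq_nil_or_concat stack with rfl | ⟨st', xy, rfl⟩
    · -- empty stack: the worklist is done
      have hres : pvClose (f + 1) autos orbit [] = orbit := rfl
      rw [hres]
      refine ⟨hnd, hsubP, hpmem, hreach, ?_⟩
      intro q hq phi hphi
      rcases hclosed q hq with hq' | hq'
      · simp at hq'
      · exact hq' phi hphi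
    · rw [List.concat_eq_append] at hlt hstk hclosed ⊢
      have hxyo : xy ∈ orbit := hstk xy (by simp)
      have hxyP : xy ∈ P := hsubP xy hxyo
      have hres : pvClose (f + 1) autos orbit (st' ++ [xy])
          = pvClose f autos
            (PySem.Set.update orbit (autos.flatMap (fun phi => [pvF1 phi xy, pvF2 phi xy])))
            (st' ++ (PySem.Set.ofList (autos.flatMap (fun phi => [pvF1 phi xy, pvF2 phi xy]))).filter
              (fun y => !(PySem.Set.contains orbit y))) := by
        show (match PySem.List.pop? (st' ++ [xy]) with
          | none => orbit
          | some (xy, stack') =>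
            let st := autos.foldl
              (fun (st : PySem.Set (Int × Int) × List (Int × Int)) phi =>
                [(pvApply phi xy.1, pvApply phi xy.2),
                 (pvApply phi xy.2, pvApply phi xy.1)].foldl
                  (fun st q =>
                    if PySem.Set.contains st.1 q then st
                    else (PySem.Set.add st.1 q, st.2 ++ [q])) st) (orbit, stack')
            pvClose f autos st.1 st.2) = _
        rw [PySem.List.pop?_last]
        have hG : autos.foldl (fun st phi => [pvF1 phi xy, pvF2 phi xy].foldl
              (fun st q => if PySem.Set.contains st.1 q then st
                else (PySem.Set.add st.1 q, st.2 ++ [q])) st) (orbit, st')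
            = (PySem.Set.update orbit (autos.flatMap (fun phi => [pvF1 phi xy, pvF2 phi xy])),
               st' ++ (PySem.Set.ofList (autos.flatMap (fun phi => [pvF1 phi xy, pvF2 phi xy]))).filter
                 (fun y => !(PySem.Set.contains orbit y))) := by
          rw [← List.foldl_flatMap]
          exact pv_inner_fold _ orbit st'
        show pvClose f autos (autos.foldl (fun st phi => [pvF1 phi xy, pvF2 phi xy].foldl
              (fun st q => if PySem.Set.contains st.1 q then st
                else (PySem.Set.add st.1 q, st.2 ++ [q])) st) (orbit, st')).1
            (autos.foldl (fun st phi => [pvF1 phi xy, pvF2 phi xy].foldl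
              (fun st q => if PySem.Set.contains st.1 q then st
                else (PySem.Set.add st.1 q, st.2 ++ [q])) st) (orbit, st')).2 = _
        rw [hG]
      rw [hres]
      set cs := autos.flatMap (fun phi => [pvF1 phi xy, pvF2 phi xy]) with hcs
      have hcsmem : ∀ q, q ∈ cs ↔ ∃ phi ∈ autos, q = pvF1 phi xy ∨ q = pvF2 phi xy := by
        intro q
        simp only [hcs, List.mem_flatMap, List.mem_cons]
        constructor
        · rintro ⟨phi, hphi, h | h | h⟩
          · exact ⟨phi, hphi, Or.inl h⟩
          · exact ⟨phi, hphi, Or.inr h⟩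
          · simp at h
        · rintro ⟨phi, hphi, h | h⟩
          · exact ⟨phi, hphi, Or.inl h⟩
          · exact ⟨phi, hphi, Or.inr (Or.inl h)⟩
      have hcsP : ∀ q ∈ cs, q ∈ P := by
        intro q hq
        obtain ⟨phi, hphi, h | h⟩ := (hcsmem q).1 hq
        · exact h ▸ (ctx.closed phi hphi xy hxyP).1
        · exact h ▸ (ctx.closed phi hphi xy hxyP).2
      have hcsReach : ∀ q ∈ cs, pvReach autos p q := by
        intro q hq
        obtain ⟨phi, hphi, h⟩ := (hcsmem q).1 hq
        exact Relation.ReflTransGen.tail (hreach xy hxyo) ⟨phi, hphi, h⟩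
      set F := (PySem.Set.ofList cs).filter (fun y => !(PySem.Set.contains orbit y)) with hF
      have hFsub : ∀ q ∈ F, q ∈ cs ∧ q ∉ orbit := by
        intro q hq
        rw [hF] at hq
        have h1 := List.mem_filter.1 hq
        refine ⟨(PySem.Set.mem_ofList _ _).1 h1.1, ?_⟩
        intro hmem
        have := (PySem.Set.contains_iff orbit q).2 hmem
        rw [this] at h1
        simpa using h1.2
      have hFmem : ∀ q, q ∈ cs → q ∉ orbit → q ∈ F := by
        intro q h1 h2
        rw [hF]
        refine List.mem_filter.2 ⟨(PySem.Set.mem_ofList _ _).2 h1, ?_⟩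
        simpa using h2
      have hupdlen : (PySem.Set.update orbit cs).length = orbit.length + F.length := by
        rw [PySem.Set.update_eq_append_filter, ← hF, List.length_append]
      have hupdnd : (PySem.Set.update orbit cs).Nodup := PySem.Set.nodup_update _ _ hnd
      have hupdP : ∀ q ∈ PySem.Set.update orbit cs, q ∈ P := by
        intro q hq
        rcases (PySem.Set.mem_update _ _ q).1 hq with h | h
        · exact hsubP q h
        · exact hcsP q h
      have hupdle : (PySem.Set.update orbit cs).length ≤ P.length :=
        List.Subperm.length_le (List.subperm_of_subset hupdnd (fun q hq => hupdP q hq))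
      have hw' : PvWInv autos P p (PySem.Set.update orbit cs) (st' ++ F) := by
        refine ⟨hupdnd, hupdP, (PySem.Set.mem_update _ _ p).2 (Or.inl hpmem), ?_, ?_, ?_⟩
        · intro q hq
          rcases List.mem_append.1 hq with h | h
          · exact (PySem.Set.mem_update _ _ q).2 (Or.inl (hstk q (by simp [h])))
          · exact (PySem.Set.mem_update _ _ q).2 (Or.inr (hFsub q h).1)
        · intro q hq
          rcases (PySem.Set.mem_update _ _ q).1 hq with h | h
          · exact hreach q h
          · exact hcsReach q h
        · intro q hq
          rcases (PySem.Set.mem_update _ _ q).1 hq with h | h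
          · rcases hclosed q h with h' | h'
            · rcases List.mem_append.1 (by simpa using h' : q ∈ st' ++ [xy]) with h'' | h''
              · exact Or.inl (List.mem_append.2 (Or.inl h''))
              · -- q = xy: all its images are in cs hence in the new orbit
                have hqxy : q = xy := by simpa using h''
                subst hqxy
                refine Or.inr ?_
                intro phi hphi
                constructor
                · exact (PySem.Set.mem_update _ _ _).2
                    (Or.inr ((hcsmem _).2 ⟨phi, hphi, Or.inl rfl⟩))
                · exact (PySem.Set.mem_update _ _ _).2
                    (Or.inr ((hcsmem _).2 ⟨phi, hphi, Or.inr rfl⟩))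
            · refine Or.inr ?_
              intro phi hphi
              exact ⟨(PySem.Set.mem_update _ _ _).2 (Or.inl (h' phi hphi).1),
                (PySem.Set.mem_update _ _ _).2 (Or.inl (h' phi hphi).2)⟩
          · by_cases hqo : q ∈ orbit
            · -- already handled above as an orbit member; reuse that case
              rcases hclosed q hqo with h' | h'
              · rcases List.mem_append.1 (by simpa using h' : q ∈ st' ++ [xy]) with h'' | h''
                · exact Or.inl (List.mem_append.2 (Or.inl h''))
                · have hqxy : q = xy := by simpa using h''
                  subst hqxy
                  refine Or.inr ?_
                  intro phi hphi
                  constructor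
                  · exact (PySem.Set.mem_update _ _ _).2
                      (Or.inr ((hcsmem _).2 ⟨phi, hphi, Or.inl rfl⟩))
                  · exact (PySem.Set.mem_update _ _ _).2
                      (Or.inr ((hcsmem _).2 ⟨phi, hphi, Or.inr rfl⟩))
              · refine Or.inr ?_
                intro phi hphi
                exact ⟨(PySem.Set.mem_update _ _ _).2 (Or.inl (h' phi hphi).1),
                  (PySem.Set.mem_update _ _ _).2 (Or.inl (h' phi hphi).2)⟩
            · exact Or.inl (List.mem_append.2 (Or.inr (hFmem q h hqo)))
      have hfuel : (st' ++ F).length + 2 * (P.length - (PySem.Set.update orbit cs).length) < f := by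
        have h0 : orbit.length ≤ P.length :=
          List.Subperm.length_le (List.subperm_of_subset hnd (fun q hq => hsubP q hq))
        rw [List.length_append, hupdlen]
        simp only [List.length_append, List.length_cons] at hlt
        omega
      exact ih (PySem.Set.update orbit cs) (st' ++ F) hw' hfuel

lemma pv_close_orbit {autos : List (List Int)} {P : List (Int × Int)} {p : Int × Int}
    (ctx : PvCtx autos P) (hp : p ∈ P) (f : Nat) (hf : 2 * P.length < f) :
    (pvClose f autos (PySem.Set.ofList [p]) [p]).Nodup ∧
      ∀ q, q ∈ pvClose f autos (PySem.Set.ofList [p]) [p] ↔ pvReach autos p q := by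
  have hof : PySem.Set.ofList [p] = [p] := rfl
  have hw : PvWInv autos P p (PySem.Set.ofList [p]) [p] := by
    rw [hof]
    refine ⟨by simp, by simpa using hp, by simp, by simp, ?_, ?_⟩
    · intro q hq
      simp at hq
      subst hq
      exact Relation.ReflTransGen.refl
    · intro q hq
      simp at hq
      subst hq
      exact Or.inl (by simp)
  have hlen : P.length ≥ 1 := by
    have := List.length_pos_of_mem hp
    omega
  have hfuel : ([p] : List (Int × Int)).length
      + 2 * (P.length - (PySem.Set.ofList [p]).length) < f := by
    rw [hof]
    simp only [List.length_singleton]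
    omega
  obtain ⟨h1, h2, h3, h4, h5⟩ := pv_close_spec ctx f (PySem.Set.ofList [p]) [p] hw hfuel
  refine ⟨h1, ?_⟩
  intro q
  constructor
  · exact h4 q
  · intro hr
    induction hr with
    | refl => exact h3
    | tail hr hstep ihq =>
      obtain ⟨phi, hphi, h | h⟩ := hstep
      · exact h ▸ (h5 _ ihq phi hphi).1
      · exact h ▸ (h5 _ ihq phi hphi).2

-- ---------- lexicographic order on pairs (Python tuple comparison) ----------
def pvLt (a b : Int × Int) : Prop := a.1 < b.1 ∨ (a.1 = b.1 ∧ a.2 < b.2)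
def pvLe (a b : Int × Int) : Prop := pvLt a b ∨ a = b

def pvBefore (a b : Int × Int) : Bool :=
  decide (a.1 < b.1) || (!decide (b.1 < a.1) && decide (a.2 < b.2))

lemma pv_before_iff {a b : Int × Int} : pvBefore a b = true ↔ pvLt a b := by
  unfold pvBefore pvLt
  rcases a with ⟨a1, a2⟩
  rcases b with ⟨b1, b2⟩
  simp only [Bool.or_eq_true, Bool.and_eq_true, Bool.not_eq_true', decide_eq_true_eq,
    decide_eq_false_iff_not]
  constructor
  · rintro (h | ⟨h1, h2⟩)
    · exact Or.inl h
    · rcases lt_trichotomy a1 b1 with h' | h' | h'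
      · exact Or.inl h'
      · exact Or.inr ⟨h', h2⟩
      · exact absurd h' h1
  · rintro (h | ⟨h1, h2⟩)
    · exact Or.inl h
    · exact Or.inr ⟨by omega, h2⟩

lemma pv_lt_asymm {a b : Int × Int} (h : pvLt a b) : ¬ pvLt b a := by
  unfold pvLt at *
  omega

lemma pv_le_total (a b : Int × Int) : pvLe a b ∨ pvLe b a := by
  unfold pvLe pvLt
  rcases a with ⟨a1, a2⟩
  rcases b with ⟨b1, b2⟩
  simp only [Prod.mk.injEq]
  omega

lemma pv_le_antisymm {a b : Int × Int} (h1 : pvLe a b) (h2 : pvLe b a) : a = b := by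
  unfold pvLe pvLt at *
  rcases a with ⟨a1, a2⟩
  rcases b with ⟨b1, b2⟩
  simp only [Prod.mk.injEq] at *
  omega

lemma pv_le_trans {a b c : Int × Int} (h1 : pvLe a b) (h2 : pvLe b c) : pvLe a c := by
  unfold pvLe pvLt at *
  rcases a with ⟨a1, a2⟩
  rcases b with ⟨b1, b2⟩
  rcases c with ⟨c1, c2⟩
  simp only [Prod.mk.injEq] at *
  omega

lemma pv_insertBy_pairwise (x : Int × Int) :
    ∀ (acc : List (Int × Int)), acc.Pairwise pvLe →
      (PySem.List.insertBy pvBefore x acc).Pairwise pvLe := by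
  intro acc
  induction acc with
  | nil => intro _; simp [PySem.List.insertBy]
  | cons y ys ih =>
    intro hp
    obtain ⟨hy, hys⟩ := List.pairwise_cons.1 hp
    show (if pvBefore x y = true then x :: y :: ys else y :: PySem.List.insertBy pvBefore x ys).Pairwise pvLe
    by_cases hxy : pvBefore x y = true
    · rw [if_pos hxy]
      have hlt : pvLt x y := pv_before_iff.1 hxy
      refine List.pairwise_cons.2 ⟨?_, hp⟩
      intro z hz
      rcases List.mem_cons.1 hz with rfl | hz'
      · exact Or.inl hlt
      · exact pv_le_trans (Or.inl hlt) (hy z hz')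
    · rw [if_neg hxy]
      refine List.pairwise_cons.2 ⟨?_, ih hys⟩
      intro z hz
      rcases (PySem.List.mem_insertBy _ _ _ _).1 hz with rfl | hz'
      · -- y ≤ x since ¬ (x < y)
        have : ¬ pvLt z y := fun hc => hxy (pv_before_iff.2 hc)
        rcases pv_le_total y z with h | h
        · exact h
        · rcases h with h | h
          · exact absurd h this
          · exact Or.inr h.symm
      · exact hy z hz'

lemma pv_sorted2_pairwise (xs : List (Int × Int)) :
    (PySem.List.sorted2 xs Prod.fst Prod.snd).Pairwise pvLe := by
  have hdef : PySem.List.sorted2 xs Prod.fst Prod.snd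
      = xs.foldl (fun acc x => PySem.List.insertBy pvBefore x acc) [] := rfl
  rw [hdef]
  have : ∀ (l : List (Int × Int)) (acc : List (Int × Int)), acc.Pairwise pvLe →
      (l.foldl (fun acc x => PySem.List.insertBy pvBefore x acc) acc).Pairwise pvLe := by
    intro l
    induction l with
    | nil => intro acc h; exact h
    | cons x l ih =>
      intro acc h
      exact ih _ (pv_insertBy_pairwise x acc h)
  exact this xs [] (by simp)

lemma pv_sorted2_canon {xs ys : List (Int × Int)} (hp : ys.Perm xs) (hs : ys.Pairwise pvLt) :
    PySem.List.sorted2 xs Prod.fst Prod.snd = ys := by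
  refine List.Perm.eq_of_pairwise (le := pvLe) ?_ (pv_sorted2_pairwise xs) ?_ ?_
  · intro a b _ _ hab hba
    exact pv_le_antisymm hab hba
  · exact hs.imp (fun h => Or.inl h)
  · exact (PySem.List.sorted2_perm xs Prod.fst Prod.snd false).trans hp.symm

lemma pv_min2_stay (step : Option (Int × Int) → (Int × Int) → Option (Int × Int))
    (hstep : ∀ m y, pvBefore y m = false → step (some m) y = some m) :
    ∀ (t : List (Int × Int)) (m : Int × Int), (∀ y ∈ t, pvBefore y m = false) →
      t.foldl step (some m) = some m := by
  intro t
  induction t with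
  | nil => intro m _; rfl
  | cons y t ih =>
    intro m h
    simp only [List.foldl_cons]
    rw [hstep m y (h y List.mem_cons_self)]
    exact ih m (fun z hz => h z (List.mem_cons_of_mem _ hz))

lemma pv_min2_head {x : Int × Int} {t : List (Int × Int)}
    (h : (x :: t).Pairwise pvLt) :
    PySem.List.min2? (x :: t) Prod.fst Prod.snd = some x := by
  obtain ⟨hx, -⟩ := List.pairwise_cons.1 h
  show (x :: t).foldl _ none = some x
  simp only [List.foldl_cons]
  refine pv_min2_stay _ ?_ t x ?_
  · intro m y hy
    show (if (decide (y.1 < m.1) || !decide (m.1 < y.1) && decide (y.2 < m.2)) = true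
        then some y else some m) = some m
    rw [if_neg]
    intro hc
    simp only [Bool.or_eq_true, Bool.and_eq_true, Bool.not_eq_true', decide_eq_true_eq,
      decide_eq_false_iff_not] at hc
    have hlt : pvLt y m := by
      unfold pvLt
      rcases hc with h1 | ⟨h1, h2⟩
      · exact Or.inl h1
      · rcases lt_trichotomy y.1 m.1 with h' | h' | h'
        · exact Or.inl h'
        · exact Or.inr ⟨h', h2⟩
        · exact absurd h' h1
    rw [pv_before_iff.2 hlt] at hy
    simp at hy
  · intro y hyt
    have : ¬ pvLt y x := pv_lt_asymm (hx y hyt)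
    by_contra hc
    simp only [Bool.not_eq_false] at hc
    exact this (pv_before_iff.1 hc)

-- ---------- instantiation: the pair universe and the automorphism list ----------
lemma pv_mem_pairs {L_n : Int} {p : Int × Int} :
    p ∈ pvPairsList L_n ↔ (0 ≤ p.1 ∧ p.1 < L_n) ∧ (0 ≤ p.2 ∧ p.2 < L_n) := by
  rcases p with ⟨a, b⟩
  simp [pvPairsList, List.mem_flatMap, PySem.List.mem_pyRange_one]

lemma pv_pairs_pairwise (L_n : Int) : (pvPairsList L_n).Pairwise pvLt := by
  unfold pvPairsList
  rw [List.pairwise_flatMap]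
  constructor
  · intro a _
    rw [List.pairwise_map]
    refine (PySem.List.pairwise_lt_pyRange_one 0 L_n).imp ?_
    intro b c h
    exact Or.inr ⟨rfl, h⟩
  · refine (PySem.List.pairwise_lt_pyRange_one 0 L_n).imp ?_
    intro a1 a2 h x hx y hy
    simp only [List.mem_map] at hx hy
    obtain ⟨b1, -, rfl⟩ := hx
    obtain ⟨b2, -, rfl⟩ := hy
    exact Or.inl h

lemma pv_pairs_nodup (L_n : Int) : (pvPairsList L_n).Nodup :=
  (pv_pairs_pairwise L_n).imp (fun h => by
    intro heq
    subst heq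
    exact absurd h (by unfold pvLt; omega))

lemma pv_pairs_length (L_n : Int) : (pvPairsList L_n).length = L_n.toNat * L_n.toNat := by
  unfold pvPairsList
  rw [List.length_flatMap]
  have h1 : (PySem.List.pyRange 0 L_n 1).map
      (fun a => ((PySem.List.pyRange 0 L_n 1).map (fun b => (a, b))).length)
      = (PySem.List.pyRange 0 L_n 1).map (fun _ => L_n.toNat) := by
    refine List.map_congr_left ?_
    intro a _
    rw [List.length_map, PySem.List.length_pyRange_one]
    simp
  rw [h1, List.map_const', List.sum_replicate, smul_eq_mul,
    PySem.List.length_pyRange_one]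
  simp

lemma pv_autos_perm {L_n : Int} {L_edges : List (Int × Int)} {phi : List Int}
    (h : phi ∈ pvAutos L_n L_edges) : phi.Perm (PySem.List.pyRange 0 L_n 1) := by
  unfold pvAutos at h
  have h1 := List.mem_of_mem_filter h
  exact PySem.List.perm_of_mem_permutations h1

lemma pv_apply_getElem {L_n : Int} {phi : List Int} (hperm : phi.Perm (PySem.List.pyRange 0 L_n 1))
    {i : Int} (h0 : 0 ≤ i) (h1 : i < L_n) :
    pvApply phi i = phi[i.toNat]'(by
      rw [hperm.length_eq, PySem.List.length_pyRange_one]; omega) := by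
  unfold pvApply
  refine PySem.List.pyGetD_eq_getElem _ _ h0 ?_
  have hl : phi.length = (L_n - 0).toNat := by
    rw [hperm.length_eq, PySem.List.length_pyRange_one]
  rw [hl]
  omega

lemma pv_apply_range {L_n : Int} {phi : List Int} (hperm : phi.Perm (PySem.List.pyRange 0 L_n 1))
    {i : Int} (h0 : 0 ≤ i) (h1 : i < L_n) :
    0 ≤ pvApply phi i ∧ pvApply phi i < L_n := by
  rw [pv_apply_getElem hperm h0 h1]
  have hmem : phi[i.toNat]'(by
      rw [hperm.length_eq, PySem.List.length_pyRange_one]; omega) ∈ phi :=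
    List.getElem_mem _
  have := hperm.subset hmem
  rw [PySem.List.mem_pyRange_one] at this
  exact this

lemma pv_apply_inj {L_n : Int} {phi : List Int} (hperm : phi.Perm (PySem.List.pyRange 0 L_n 1))
    {i j : Int} (hi0 : 0 ≤ i) (hi1 : i < L_n) (hj0 : 0 ≤ j) (hj1 : j < L_n)
    (h : pvApply phi i = pvApply phi j) : i = j := by
  rw [pv_apply_getElem hperm hi0 hi1, pv_apply_getElem hperm hj0 hj1] at h
  have hnd : phi.Nodup := hperm.nodup_iff.2 (PySem.List.nodup_pyRange_one 0 L_n)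
  have := (hnd.getElem_inj_iff).1 h
  omega

lemma pv_ctx (L_n : Int) (L_edges : List (Int × Int)) :
    PvCtx (pvAutos L_n L_edges) (pvPairsList L_n) := by
  refine ⟨pv_pairs_nodup L_n, ?_, ?_, ?_⟩
  · intro phi hphi p hp
    have hperm := pv_autos_perm hphi
    rw [pv_mem_pairs] at hp
    constructor
    · rw [pv_mem_pairs]
      exact ⟨pv_apply_range hperm hp.1.1 hp.1.2, pv_apply_range hperm hp.2.1 hp.2.2⟩
    · rw [pv_mem_pairs]
      exact ⟨pv_apply_range hperm hp.2.1 hp.2.2, pv_apply_range hperm hp.1.1 hp.1.2⟩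
  · intro phi hphi p hp q hq h
    have hperm := pv_autos_perm hphi
    rw [pv_mem_pairs] at hp hq
    have h1 := congrArg Prod.fst h
    have h2 := congrArg Prod.snd h
    simp only [pvF1] at h1 h2
    refine Prod.ext ?_ ?_
    · exact pv_apply_inj hperm hp.1.1 hp.1.2 hq.1.1 hq.1.2 h1
    · exact pv_apply_inj hperm hp.2.1 hp.2.2 hq.2.1 hq.2.2 h2
  · intro phi hphi p hp q hq h
    have hperm := pv_autos_perm hphi
    rw [pv_mem_pairs] at hp hq
    have h1 := congrArg Prod.fst h
    have h2 := congrArg Prod.snd h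
    simp only [pvF2] at h1 h2
    refine Prod.ext ?_ ?_
    · exact pv_apply_inj hperm hp.1.1 hp.1.2 hq.1.1 hq.1.2 h2
    · exact pv_apply_inj hperm hp.2.1 hp.2.2 hq.2.1 hq.2.2 h1

-- ---------- canonical result ----------
def pvRoots (L_n : Int) (L_edges : List (Int × Int)) : List (Int × Int) :=
  PySem.List.dedup ((pvPairsList L_n).map (pvR (pvAutos L_n L_edges) (pvPairsList L_n)))

def pvClassOf (L_n : Int) (L_edges : List (Int × Int)) (r : Int × Int) : List (Int × Int) :=
  (pvPairsList L_n).filter (fun v => pvR (pvAutos L_n L_edges) (pvPairsList L_n) v == r)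

def pvCanon (L_n : Int) (L_edges : List (Int × Int)) : List (Int × Int × List (Int × Int)) :=
  (pvRoots L_n L_edges).map (fun r =>
    (((pvClassOf L_n L_edges r).headD (0, 0)).1, ((pvClassOf L_n L_edges r).headD (0, 0)).2,
      pvClassOf L_n L_edges r))

lemma pv_class_head (L_n : Int) (L_edges : List (Int × Int)) {r : Int × Int}
    (hr : r ∈ pvRoots L_n L_edges) :
    pvClassOf L_n L_edges r ≠ [] ∧
      (pvClassOf L_n L_edges r).headD (0, 0) ∈ pvClassOf L_n L_edges r ∧
      pvR (pvAutos L_n L_edges) (pvPairsList L_n) ((pvClassOf L_n L_edges r).headD (0, 0)) = r := by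
  unfold pvRoots at hr
  rw [PySem.List.mem_dedup] at hr
  obtain ⟨v, hv, hRv⟩ := List.mem_map.1 hr
  have hvin : v ∈ pvClassOf L_n L_edges r := by
    unfold pvClassOf
    refine List.mem_filter.2 ⟨hv, by simp [hRv]⟩
  have hne : pvClassOf L_n L_edges r ≠ [] := by
    intro h
    rw [h] at hvin
    simp at hvin
  obtain ⟨x, t, hxt⟩ := List.exists_cons_of_ne_nil hne
  have hh : (pvClassOf L_n L_edges r).headD (0, 0) = x := by rw [hxt]; rfl
  have hxm : x ∈ pvClassOf L_n L_edges r := by rw [hxt]; exact List.mem_cons_self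
  refine ⟨hne, by rw [hh]; exact hxm, ?_⟩
  rw [hh]
  have := (List.mem_filter.1 hxm).2
  simpa using this

lemma pv_class_pairwise (L_n : Int) (L_edges : List (Int × Int)) (r : Int × Int) :
    (pvClassOf L_n L_edges r).Pairwise pvLt :=
  (pv_pairs_pairwise L_n).filter _

lemma pv_class_min (L_n : Int) (L_edges : List (Int × Int)) {r : Int × Int}
    (hr : r ∈ pvRoots L_n L_edges) :
    (PySem.List.min2? (pvClassOf L_n L_edges r) Prod.fst Prod.snd).getD (0, 0)
      = (pvClassOf L_n L_edges r).headD (0, 0) := by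
  obtain ⟨hne, -, -⟩ := pv_class_head L_n L_edges hr
  obtain ⟨x, t, hxt⟩ := List.exists_cons_of_ne_nil hne
  rw [hxt]
  have hpw : (x :: t).Pairwise pvLt := by
    rw [← hxt]; exact pv_class_pairwise L_n L_edges r
  rw [pv_min2_head hpw]
  rfl

lemma pv_A_eq (L_n : Int) (L_edges : List (Int × Int)) :
    compute_root_orbits L_n L_edges = pvCanon L_n L_edges := by
  have ctx := pv_ctx L_n L_edges
  obtain ⟨hGood, hchar⟩ := pv_parent1_char (autos := pvAutos L_n L_edges) ctx.nodup
    (fun phi hphi p hp => ctx.closed phi hphi p hp)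
  simp only [compute_root_orbits]
  -- step 1: the union loop is the fold over pvUAll
  have hpar : (pvAutos L_n L_edges).foldl (fun par phi => (pvPairsList L_n).foldl (fun par p =>
        pvUnion (pvUnion par p (pvApply phi p.1, pvApply phi p.2)) p
          (pvApply phi p.2, pvApply phi p.1)) par)
        ((pvPairsList L_n).foldl (fun d p => d.insert p p) PySem.Dict.empty)
      = pvParent1 (pvAutos L_n L_edges) (pvPairsList L_n) := by
    unfold pvParent1 pvParent0 pvUAll
    rw [List.foldl_flatMap]
    have hfn : (fun (acc : PySem.Dict (Int × Int) (Int × Int)) (phi : List Int) =>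
        List.foldl (fun par uv => pvUnion par uv.1 uv.2) acc
          ((pvPairsList L_n).flatMap (fun p => [(p, pvF1 phi p), (p, pvF2 phi p)])))
        = fun par phi => (pvPairsList L_n).foldl (fun par p =>
            pvUnion (pvUnion par p (pvApply phi p.1, pvApply phi p.2)) p
              (pvApply phi p.2, pvApply phi p.1)) par := by
      funext par phi
      rw [List.foldl_flatMap]
      rfl
    rw [hfn]
  rw [hpar]
  -- step 2: the grouping loop
  have hgrp := pv_phase2_gen (autos := pvAutos L_n L_edges) (P := pvPairsList L_n) hGood.1
    (pvPairsList L_n) PySem.Dict.empty (pvParent1 (pvAutos L_n L_edges) (pvPairsList L_n))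
    (fun v hv => hv) hGood.1 (fun z r => Iff.rfl)
  rw [hgrp]
  -- step 3: the grouped dict's items
  set R := pvR (pvAutos L_n L_edges) (pvPairsList L_n) with hR
  have hitems := pv_groups_items (P := pvPairsList L_n) R
  have hvalues : ((pvPairsList L_n).foldl (fun o v => o.modify (R v) [] (· ++ [v]))
      (PySem.Dict.empty : PySem.Dict (Int × Int) (List (Int × Int)))).values
      = (pvRoots L_n L_edges).map (fun r => pvClassOf L_n L_edges r) := by
    show ((pvPairsList L_n).foldl (fun o v => o.modify (R v) [] (· ++ [v]))
      (PySem.Dict.empty : PySem.Dict (Int × Int) (List (Int × Int)))).items.map (·.2) = _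
    rw [hitems]
    rw [List.map_map]
    rfl
  rw [hvalues]
  -- step 4: the final dict built from the classes
  rw [List.foldl_map]
  have hfresh := PySem.Dict.items_foldl_insert_fresh (l := pvRoots L_n L_edges)
    (k := fun r => (PySem.List.min2? (pvClassOf L_n L_edges r) Prod.fst Prod.snd).getD (0, 0))
    (v := fun r => PySem.List.sorted2 (pvClassOf L_n L_edges r) Prod.fst Prod.snd)
    (d := (PySem.Dict.empty : PySem.Dict (Int × Int) (List (Int × Int))))
    (by intro a _; simp [PySem.Dict.contains_empty])
    (by
      have hmapeq : (pvRoots L_n L_edges).map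
          (fun r => (PySem.List.min2? (pvClassOf L_n L_edges r) Prod.fst Prod.snd).getD (0, 0))
          = (pvRoots L_n L_edges).map (fun r => (pvClassOf L_n L_edges r).headD (0, 0)) :=
        List.map_congr_left (fun r hr => pv_class_min L_n L_edges hr)
      rw [hmapeq]
      refine List.Nodup.map_on ?_ ?_
      · intro r1 hr1 r2 hr2 heq
        have h1 := (pv_class_head L_n L_edges hr1).2.2
        have h2 := (pv_class_head L_n L_edges hr2).2.2
        rw [← h1, ← h2, heq]
      · unfold pvRoots
        exact PySem.List.nodup_dedup _)
  rw [hfresh]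
  have hempty : (PySem.Dict.empty : PySem.Dict (Int × Int) (List (Int × Int))).items = [] := rfl
  rw [hempty, List.nil_append, List.map_map]
  unfold pvCanon
  refine List.map_congr_left ?_
  intro r hr
  have hkey := pv_class_min L_n L_edges hr
  have hsorted : PySem.List.sorted2 (pvClassOf L_n L_edges r) Prod.fst Prod.snd
      = pvClassOf L_n L_edges r :=
    pv_sorted2_canon (List.Perm.refl _) (pv_class_pairwise L_n L_edges r)
  simp only [Function.comp_apply]
  rw [hkey, hsorted]

lemma pv_filter_head {P : List (Int × Int)} {R : (Int × Int) → (Int × Int)} {r : Int × Int}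
    (v : Int × Int) (hv : v ∈ P) (hRv : R v = r) :
    (P.filter (fun v => R v == r)).headD (0, 0) ∈ P.filter (fun v => R v == r) ∧
      R ((P.filter (fun v => R v == r)).headD (0, 0)) = r := by
  have hvin : v ∈ P.filter (fun v => R v == r) := List.mem_filter.2 ⟨hv, by simp [hRv]⟩
  have hne : P.filter (fun v => R v == r) ≠ [] := by
    intro h; rw [h] at hvin; simp at hvin
  obtain ⟨x, t, hxt⟩ := List.exists_cons_of_ne_nil hne
  have hh : (P.filter (fun v => R v == r)).headD (0, 0) = x := by rw [hxt]; rfl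
  have hxm : x ∈ P.filter (fun v => R v == r) := by rw [hxt]; exact List.mem_cons_self
  refine ⟨by rw [hh]; exact hxm, ?_⟩
  rw [hh]
  have := (List.mem_filter.1 hxm).2
  simpa using this

lemma pv_scanB (P : List (Int × Int)) (R : (Int × Int) → (Int × Int))
    (orbitFn : (Int × Int) → List (Int × Int))
    (horb : ∀ p ∈ P, ∀ q, q ∈ orbitFn p ↔ (q ∈ P ∧ R q = R p))
    (hsv : ∀ p ∈ P, PySem.List.sorted2 (orbitFn p) Prod.fst Prod.snd
      = PySem.List.sorted2 (P.filter (fun v => R v == R p)) Prod.fst Prod.snd) :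
    ∀ (L pre : List (Int × Int)) (vis : PySem.Set (Int × Int))
      (res : PySem.Dict (Int × Int) (List (Int × Int))),
    P = pre ++ L →
    (∀ q, q ∈ vis ↔ (q ∈ P ∧ R q ∈ pre.map R)) →
    res.items = (PySem.List.dedup (pre.map R)).map
      (fun r => ((P.filter (fun v => R v == r)).headD (0, 0),
        PySem.List.sorted2 (P.filter (fun v => R v == r)) Prod.fst Prod.snd)) →
    (L.foldl (fun st p => if PySem.Set.contains st.1 p then st
        else (PySem.Set.update st.1 (orbitFn p),
          st.2.insert p (PySem.List.sorted2 (orbitFn p) Prod.fst Prod.snd))) (vis, res)).2.items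
      = (PySem.List.dedup (P.map R)).map
        (fun r => ((P.filter (fun v => R v == r)).headD (0, 0),
          PySem.List.sorted2 (P.filter (fun v => R v == r)) Prod.fst Prod.snd)) := by
  intro L
  induction L with
  | nil =>
    intro pre vis res hP hvis hres
    rw [List.append_nil] at hP
    subst hP
    exact hres
  | cons p L ih =>
    intro pre vis res hP hvis hres
    have hpP : p ∈ P := by rw [hP]; exact List.mem_append.2 (Or.inr List.mem_cons_self)
    simp only [List.foldl_cons]
    by_cases hpv : p ∈ vis
    · rw [if_pos ((PySem.Set.contains_iff vis p).2 hpv)]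
      have hRp : R p ∈ pre.map R := ((hvis p).1 hpv).2
      refine ih (pre ++ [p]) vis res (by rw [hP, List.append_assoc]; rfl) ?_ ?_
      · intro q
        rw [hvis q]
        constructor
        · rintro ⟨h1, h2⟩
          exact ⟨h1, by rw [List.map_append]; exact List.mem_append.2 (Or.inl h2)⟩
        · rintro ⟨h1, h2⟩
          rw [List.map_append] at h2
          rcases List.mem_append.1 h2 with h | h
          · exact ⟨h1, h⟩
          · simp only [List.map_cons, List.map_nil, List.mem_singleton] at h
            exact ⟨h1, h ▸ hRp⟩
      · rw [hres]
        have : PySem.List.dedup ((pre ++ [p]).map R) = PySem.List.dedup (pre.map R) := by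
          rw [List.map_append, PySem.List.dedup_eq_ofList, PySem.List.dedup_eq_ofList]
          show PySem.Set.ofList (pre.map R ++ [R p]) = _
          rw [PySem.Set.ofList_append_singleton,
            PySem.Set.add_of_mem (by rw [PySem.Set.mem_ofList]; exact hRp)]
        rw [this]
    · rw [if_neg (by
        intro hc
        exact hpv ((PySem.Set.contains_iff vis p).1 hc))]
      have hRfresh : R p ∉ pre.map R := by
        intro hc
        exact hpv ((hvis p).2 ⟨hpP, hc⟩)
      -- the head of p's class is p itself
      have hpre0 : pre.filter (fun v => R v == R p) = [] := by
        rw [List.filter_eq_nil_iff]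
        intro v hv hc
        refine hRfresh ?_
        have : R v = R p := by simpa using hc
        rw [← this]
        exact List.mem_map.2 ⟨v, hv, rfl⟩
      have hhead : (P.filter (fun v => R v == R p)).headD (0, 0) = p := by
        rw [hP, List.filter_append, hpre0, List.nil_append, List.filter_cons_of_pos (by simp)]
        rfl
      -- freshness of the key p in the result dict
      have hkeys : res.contains p = false := by
        by_contra hc
        simp only [Bool.not_eq_false] at hc
        have hk := (PySem.Dict.contains_iff_mem_keys res p).1 hc
        have : p ∈ res.items.map Prod.fst := hk
        rw [hres, List.map_map] at this
        obtain ⟨r', hr', hpr'⟩ := List.mem_map.1 this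
        simp only [Function.comp_apply] at hpr'
        -- p is the head of class r', so R p = r' is an old root
        have hr'mem : r' ∈ (pre.map R) := (PySem.List.mem_dedup _ _).1 hr'
        obtain ⟨v, hv, hRv⟩ := List.mem_map.1 hr'mem
        have hvP : v ∈ P := by rw [hP]; exact List.mem_append.2 (Or.inl hv)
        obtain ⟨-, hRhead⟩ := pv_filter_head (P := P) (R := R) v hvP hRv
        rw [hpr'] at hRhead
        exact hRfresh (by rw [hRhead]; exact hr'mem)
      have hitems' : (res.insert p (PySem.List.sorted2 (orbitFn p) Prod.fst Prod.snd)).items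
          = res.items ++ [(p, PySem.List.sorted2 (orbitFn p) Prod.fst Prod.snd)] :=
        PySem.Dict.items_insert_of_not_contains _ _ hkeys
      refine ih (pre ++ [p]) _ _ (by rw [hP, List.append_assoc]; rfl) ?_ ?_
      · intro q
        rw [PySem.Set.mem_update, hvis q]
        constructor
        · rintro (⟨h1, h2⟩ | h)
          · exact ⟨h1, by rw [List.map_append]; exact List.mem_append.2 (Or.inl h2)⟩
          · obtain ⟨h1, h2⟩ := (horb p hpP q).1 h
            refine ⟨h1, ?_⟩
            rw [List.map_append]
            refine List.mem_append.2 (Or.inr ?_)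
            simp [h2]
        · rintro ⟨h1, h2⟩
          rw [List.map_append] at h2
          rcases List.mem_append.1 h2 with h | h
          · exact Or.inl ⟨h1, h⟩
          · simp only [List.map_cons, List.map_nil, List.mem_singleton] at h
            exact Or.inr ((horb p hpP q).2 ⟨h1, h⟩)
      · rw [hitems', hres]
        have hded : PySem.List.dedup ((pre ++ [p]).map R)
            = PySem.List.dedup (pre.map R) ++ [R p] := by
          rw [List.map_append, PySem.List.dedup_eq_ofList, PySem.List.dedup_eq_ofList]
          show PySem.Set.ofList (pre.map R ++ [R p]) = _
          rw [PySem.Set.ofList_append_singleton,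
            PySem.Set.add_of_not_mem (by rw [PySem.Set.mem_ofList]; exact hRfresh)]
        rw [hded, List.map_append]
        refine congrArg _ ?_
        simp only [List.map_cons, List.map_nil]
        rw [hhead, hsv p hpP]

lemma pv_B_eq (L_n : Int) (L_edges : List (Int × Int)) :
    compute_root_orbits_alt L_n L_edges = pvCanon L_n L_edges := by
  have ctx := pv_ctx L_n L_edges
  obtain ⟨hGood, hchar⟩ := pv_parent1_char (autos := pvAutos L_n L_edges) ctx.nodup
    (fun phi hphi p hp => ctx.closed phi hphi p hp)
  have hfuelgt : 2 * (pvPairsList L_n).length < 2 * (L_n.toNat * L_n.toNat) + 2 := by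
    rw [pv_pairs_length]; omega
  have horb : ∀ p ∈ pvPairsList L_n, ∀ q : Int × Int,
      q ∈ pvClose (2 * (L_n.toNat * L_n.toNat) + 2) (pvAutos L_n L_edges)
          (PySem.Set.ofList [p]) [p]
        ↔ (q ∈ pvPairsList L_n ∧
            pvR (pvAutos L_n L_edges) (pvPairsList L_n) q
              = pvR (pvAutos L_n L_edges) (pvPairsList L_n) p) := by
    intro p hp q
    obtain ⟨hnd, hmem⟩ := pv_close_orbit ctx hp _ hfuelgt
    rw [hmem q]
    constructor
    · intro hr
      have hq : q ∈ pvPairsList L_n := pv_reach_mem ctx hp hr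
      have hE : pvE (pvAutos L_n L_edges) (pvPairsList L_n) p q :=
        (pv_E_iff_reach ctx hp).2 hr
      obtain ⟨r, h1, h2⟩ := (hchar p q).2 hE
      have e1 := pv_rootp_unique (pvR_rootp hGood.1 hp) h1
      have e2 := pv_rootp_unique (pvR_rootp hGood.1 hq) h2
      exact ⟨hq, by rw [e1, e2]⟩
    · rintro ⟨hq, hRq⟩
      refine (pv_E_iff_reach ctx hp).1 ?_
      refine (hchar p q).1 ⟨pvR (pvAutos L_n L_edges) (pvPairsList L_n) p,
        pvR_rootp hGood.1 hp, ?_⟩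
      rw [← hRq]
      exact pvR_rootp hGood.1 hq
  have hndorb : ∀ p ∈ pvPairsList L_n,
      (pvClose (2 * (L_n.toNat * L_n.toNat) + 2) (pvAutos L_n L_edges)
        (PySem.Set.ofList [p]) [p]).Nodup :=
    fun p hp => (pv_close_orbit ctx hp _ hfuelgt).1
  have hsv : ∀ p ∈ pvPairsList L_n,
      PySem.List.sorted2 (pvClose (2 * (L_n.toNat * L_n.toNat) + 2) (pvAutos L_n L_edges)
          (PySem.Set.ofList [p]) [p]) Prod.fst Prod.snd
        = PySem.List.sorted2 ((pvPairsList L_n).filter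
            (fun v => pvR (pvAutos L_n L_edges) (pvPairsList L_n) v
              == pvR (pvAutos L_n L_edges) (pvPairsList L_n) p)) Prod.fst Prod.snd := by
    intro p hp
    have hclassnd : ((pvPairsList L_n).filter
        (fun v => pvR (pvAutos L_n L_edges) (pvPairsList L_n) v
          == pvR (pvAutos L_n L_edges) (pvPairsList L_n) p)).Nodup :=
      (pv_pairs_nodup L_n).filter _
    have hperm : ((pvPairsList L_n).filter
        (fun v => pvR (pvAutos L_n L_edges) (pvPairsList L_n) v
          == pvR (pvAutos L_n L_edges) (pvPairsList L_n) p)).Perm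
        (pvClose (2 * (L_n.toNat * L_n.toNat) + 2) (pvAutos L_n L_edges)
          (PySem.Set.ofList [p]) [p]) := by
      refine (List.perm_ext_iff_of_nodup hclassnd (hndorb p hp)).2 ?_
      intro q
      rw [horb p hp q, List.mem_filter]
      simp
    have hpw : ((pvPairsList L_n).filter
        (fun v => pvR (pvAutos L_n L_edges) (pvPairsList L_n) v
          == pvR (pvAutos L_n L_edges) (pvPairsList L_n) p)).Pairwise pvLt :=
      (pv_pairs_pairwise L_n).filter _
    rw [pv_sorted2_canon hperm hpw, pv_sorted2_canon (List.Perm.refl _) hpw]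
  simp only [compute_root_orbits_alt]
  have hscan : ((pvPairsList L_n).foldl (fun st p =>
      if PySem.Set.contains st.1 p then st
      else (PySem.Set.update st.1 (pvClose (2 * (L_n.toNat * L_n.toNat) + 2)
          (pvAutos L_n L_edges) (PySem.Set.ofList [p]) [p]),
        st.2.insert p (PySem.List.sorted2 (pvClose (2 * (L_n.toNat * L_n.toNat) + 2)
          (pvAutos L_n L_edges) (PySem.Set.ofList [p]) [p]) Prod.fst Prod.snd)))
      (PySem.Set.empty, PySem.Dict.empty)).2.items
      = (PySem.List.dedup ((pvPairsList L_n).map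
          (pvR (pvAutos L_n L_edges) (pvPairsList L_n)))).map
        (fun r => (((pvPairsList L_n).filter
            (fun v => pvR (pvAutos L_n L_edges) (pvPairsList L_n) v == r)).headD (0, 0),
          PySem.List.sorted2 ((pvPairsList L_n).filter
            (fun v => pvR (pvAutos L_n L_edges) (pvPairsList L_n) v == r))
            Prod.fst Prod.snd)) := by
    refine pv_scanB (pvPairsList L_n) (pvR (pvAutos L_n L_edges) (pvPairsList L_n))
      (fun p => pvClose (2 * (L_n.toNat * L_n.toNat) + 2) (pvAutos L_n L_edges)
        (PySem.Set.ofList [p]) [p]) horb hsv (pvPairsList L_n) [] PySem.Set.empty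
      PySem.Dict.empty rfl ?_ rfl
    intro q
    constructor
    · intro h; simp [PySem.Set.empty] at h
    · rintro ⟨-, h⟩; simp at h
  rw [hscan, List.map_map]
  unfold pvCanon
  refine List.map_congr_left ?_
  intro r hr
  have hsorted : PySem.List.sorted2 (pvClassOf L_n L_edges r) Prod.fst Prod.snd
      = pvClassOf L_n L_edges r :=
    pv_sorted2_canon (List.Perm.refl _) (pv_class_pairwise L_n L_edges r)
  simp only [Function.comp_apply]
  show ((((pvClassOf L_n L_edges r).headD (0, 0)).1, ((pvClassOf L_n L_edges r).headD (0, 0)).2,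
    PySem.List.sorted2 (pvClassOf L_n L_edges r) Prod.fst Prod.snd)) = _
  rw [hsorted]

-- ===== VERDICT (by name: the statement is the Claim_ definition above) =====
theorem compute_root_orbits_spec : Claim_equal_compute_root_orbits := by
  intro L_n L_edges _ _
  show compute_root_orbits L_n L_edges = compute_root_orbits_alt L_n L_edges
  rw [pv_A_eq, pv_B_eq]
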